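/- GENERATED by mk_final_copies.py from the proof of the farm's unit `start_decoder.C5` (farm:start_decoder.C5.2: Lemmas.lean) as the
   re-elaboration sweep compiled it — do not edit. -/
import Asan.CheckWalk
import Vorbis.Spec.Units.start_decoder_C5
import Vorbis.Spec.StartDecoderCarry

open X86 X86.User Asan Vorbis Vorbis.Spec Vorbis.Spec.StartDecoder

set_option maxRecDepth 4000
set_option maxHeartbeats 4000000

namespace Vorbis.Spec.start_decoder_C5

/-- The objects of the callers' frames and of `A.2` are objects inside the function too (its own frame in front).
(`sub_frames'` of Vorbis/Spec/StartDecoderATest.lean, restated: the Test file is not an importable module of the farm.) -/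
theorem sub_frames (g : Ghost) (A : Arena × List Obj) (o : Obj) (h : o ∈ stackObjs g.frames ++ A.2) :
    o ∈ stackObjs g.frames' ++ A.2 := by
  unfold Ghost.frames'
  rw [stackObjs_cons]
  rcases List.mem_append.mp h with hs | ho
  · exact List.mem_append_left _ (List.mem_append_right _ hs)
  · exact List.mem_append_right _ ho

/-- **Where the struct `cb(i)` of the book under construction is**, as ONE arithmetic fact: inside the data space, off the stack
region (it lies in the codebooks block, a setup block of the arena). What the walker needs to read a field of `c` through the
return addresses that the check calls push below `R`. -/
theorem cb_where {g : Ghost} {i : Nat} {A2 A3 Ai : Arena} {A : Arena × List Obj} {v : State} (h : Cur g i A2 A3 Ai A v) :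
    0x100000 ≤ g.cb v.mem i ∧ g.cb v.mem i + 2120 ≤ 0xC00000 ∧
      (g.cb v.mem i + 2120 ≤ 0x700000 ∨ 0x800000 ≤ g.cb v.mem i) := by
  have hcbok : CodebooksOK (g.Blk A) v.mem g.f := ((h.sd.cb0 (by omega)).1).ok (h.sd.cb0 (by omega)).2
  have hcbA : A.1.Blk (codebooksBlock v.mem g.f) := (h.ages.F2.1.mono h.ages.ext3).mono h.ages.exti
  have hcb_in := hcbok.cb_in i h.lt
  have hcb_rng := h.sd.arena.block_off hcbA
  unfold Ghost.cb
  simp only [vblock, voff] at hcb_in hcb_rng ⊢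
  omega

/-- **USE: a field of the struct `cb(i)`** (`off + n ≤ 2120`) is a check site: the ten check sites of segment `C5` on `c + 4`,
`c + 8`, `c + 1BH`. -/
theorem cb_site {g : Ghost} {i : Nat} {A2 A3 Ai : Arena} {A : Arena × List Obj} {v : State} (h : Cur g i A2 A3 Ai A v)
    (off n : Nat) (h1 : off + n ≤ 2120) (h2 : 1 ≤ n) : Site (g.Live A) (g.cb v.mem i + off) n := by
  have hcbok : CodebooksOK (g.Blk A) v.mem g.f := ((h.sd.cb0 (by omega)).1).ok (h.sd.cb0 (by omega)).2
  exact CodebooksOK.site_cb_field h.sd.env.live hcbok i h.lt off n (by simp only [voff]; omega) h2 rfl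

/-- **Where `*f` is**: off the text, inside the data space, off the stack below the steady stack pointer `R`. -/
theorem f_where {u₀ : State} {g : Ghost} {pc : Word} {i : Nat} {A2 A3 Ai : Arena} {A : Arena × List Obj} {v : State}
    (hfr : Frame u₀ g pc A v) (h : Cur g i A2 A3 Ai A v) :
    0x119d40 ≤ g.f ∧ g.f + 1808 ≤ 0xC00000 ∧ (g.R ≤ g.f ∨ g.f + 1808 ≤ 0x700000 ∨ 0x800000 ≤ g.f) := by
  have hobj : LiveIn A.2 g.frames' g.f Off.sizeof.stb_vorbis := h.hand.obj.mono (sub_frames g A)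
  have hw := hobj.where_ hfr.shadow hfr.offText (by simp only [voff]; omega)
  simp only [voff] at hw
  exact hw

/-- **`Cur` over a change of the stack below the steady stack pointer.** -/
theorem cur_carry {u₀ : State} {g : Ghost} {pc : Word} {i : Nat} {A2 A3 Ai : Arena} {A : Arena × List Obj} {v w : State}
    (hfr : Frame u₀ g pc A v) (h : Cur g i A2 A3 Ai A v)
    (hs : Mem.SameExcept [⟨g.RA - 1888, g.R⟩] v.mem w.mem) (hr : w.reg .r14 = v.reg .r14) :
    Cur g i A2 A3 Ai A w := by
  obtain ⟨hra8, hralo, hrahi⟩ := hfr.ra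
  obtain ⟨hR, hR8⟩ := hfr.r_eq
  simp only [depth, steady] at hralo hR
  -- agreement off the window
  have hE : ∀ lo hi, (hi ≤ g.RA - 1888 ∨ g.R ≤ lo) → Mem.EqOn lo hi v.mem w.mem := by
    intro lo hi hd
    apply hs.eqOn lo hi
    intro s hsm
    have e : s = ⟨g.RA - 1888, g.R⟩ := List.mem_singleton.mp hsm
    subst e
    simp only
    omega
  have hfw := f_where hfr h
  have hf64 : g.f + Off.sizeof.stb_vorbis ≤ 2 ^ 64 := by
    simp only [voff]
    omega
  -- `*f` reads the same
  have hwin : ∀ s, s ∈ [(⟨g.RA - 1888, g.R⟩ : Span)] → 0x700000 ≤ s.lo ∧ s.hi ≤ 0x800000 ∧ s.hi = g.R := by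
    intro s hsm
    have e : s = ⟨g.RA - 1888, g.R⟩ := List.mem_singleton.mp hsm
    subst e
    simp only
    refine ⟨by omega, by omega, trivial⟩
  have hobjsame : (objBlock g.f).Same v.mem w.mem := by
    apply Block.Same.of_sameExcept hs
    intro s hsm
    have := hwin s hsm
    have e : Off.sizeof.stb_vorbis = 1808 := rfl
    simp only [vblock]
    omega
  have hos : ObjSame g.f v.mem w.mem := ObjSame.of_same hobjsame hf64
  have heq : ObjEq [(0, 1808)] v.mem g.f w.mem g.f := ObjEq.of_same hobjsame hf64 (by decide)
  -- the arena's blocks are kept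
  have hkA : AllKept A.1.Blk v.mem w.mem := by
    apply h.sd.arena.allKept_of_stack hs
    intro s hsm
    have e : s = ⟨g.RA - 1888, g.R⟩ := List.mem_singleton.mp hsm
    subst e
    simp only
    omega
  have hkAi : AllKept Ai.Blk v.mem w.mem := fun B hB => hkA B (hB.mono h.ages.exti)
  have ecnt : stb_vorbis.codebook_count w.mem g.f = stb_vorbis.codebook_count v.mem g.f := by
    simp only [vacc, voff]
    exact heq.i32 160 (by decide)
  have ecbs : stb_vorbis.codebooks w.mem g.f = stb_vorbis.codebooks v.mem g.f := by
    simp only [vacc, voff]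
    exact heq.u64 168 (by decide)
  have ecb : g.cb w.mem i = g.cb v.mem i := by
    unfold Ghost.cb
    simp only [stb_vorbis.codebooks_at]
    rw [ecbs]
  have hsd : SDw g.len 3 A (g.Blk A) (g.Live A) w.mem g.f g.R :=
    { env := h.sd.env.eqOn (hE _ _ (by omega))
      frame := h.sd.frame.frame (hE _ _ (by omega)) (by omega)
      arena := h.sd.arena.transfer (heq.sub (by decide))
      setups := h.sd.setups
      bits := h.sd.bits.frame hos
      first := by
        have e : stb_vorbis.first_decode w.mem g.f = stb_vorbis.first_decode v.mem g.f := by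
          simp only [vacc, voff]
          exact heq.u8 1749 (by decide)
        rw [e]
        exact h.sd.first
      discard0 := by
        have e : stb_vorbis.discard_samples_deferred w.mem g.f = stb_vorbis.discard_samples_deferred v.mem g.f := by
          simp only [vacc, voff]
          exact heq.i32 1784 (by decide)
        rw [e]
        exact h.sd.discard0
      header := fun hk => (h.sd.header hk).transfer (heq.sub (by decide))
      cb0 := fun hk => by
        refine ⟨(h.sd.cb0 hk).1.transfer (heq.sub (by decide)) (fun _ _ hb => hb), ?_⟩
        rw [ecbs]
        exact (h.sd.cb0 hk).2
      rest := by
        apply ZeroRange.frame h.sd.rest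
        · apply hE
          simp only [voff, restFrom]
          omega
        · simp only [voff]
          omega }
  have hcbA : A.1.Blk (codebooksBlock v.mem g.f) := (h.ages.F2.1.mono h.ages.ext3).mono h.ages.exti
  have hcb_rng := h.sd.arena.block_off hcbA
  simp only [vblock, voff] at hcb_rng
  have hcnt := h.ages.F1
  refine
    { sd := hsd
      hand := h.hand
      ages := h.ages.frame_old (heq.sub (by decide)) hkAi
      zf := ?_
      lt := ?_
      slot_f := ?_
      slot_i := ?_
      r14 := ?_ }
  · rw [ecbs, ecnt]
    apply ZF.same h.zf
    · apply hE
      simp only [voff]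
      omega
    · have := h.lt
      omega
    · simp only [voff]
      omega
  · rw [ecnt]
    exact h.lt
  · rw [(hE (g.R + 0x18) (g.R + 0x20) (by omega)).u64 (g.R + 0x18) (by omega) (by omega) (by omega)]
    exact h.slot_f
  · rw [(hE (g.R + 0x30) (g.R + 0x34) (by omega)).u32 (g.R + 0x30) (by omega) (by omega) (by omega)]
    exact h.slot_i
  · rw [hr, ecb]
    exact h.r14

/-- **`Frame` over a change of the stack below the steady stack pointer** (the return addresses the check calls push), at a new
program counter. -/
theorem frame_carry {u₀ : State} {g : Ghost} {pc : Word} {A : Arena × List Obj} {v w : State}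
    (hfr : Frame u₀ g pc A v) (pc' : Word)
    (hs : Mem.SameExcept [⟨g.RA - 1888, g.R⟩] v.mem w.mem) (hrip : w.rip = pc') (hrsp : w.reg .rsp = v.reg .rsp)
    (hinv : abiInv w) : Frame u₀ g pc' A w := by
  obtain ⟨hra8, hralo, hrahi⟩ := hfr.ra
  obtain ⟨hR, hR8⟩ := hfr.r_eq
  simp only [depth, steady] at hralo hR
  have hE : ∀ lo hi, (hi ≤ g.RA - 1888 ∨ g.R ≤ lo) → Mem.EqOn lo hi v.mem w.mem := by
    intro lo hi hd
    apply hs.eqOn lo hi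
    intro s hsm
    have e : s = ⟨g.RA - 1888, g.R⟩ := List.mem_singleton.mp hsm
    subst e
    simp only
    omega
  have hup : Mem.EqOn g.R (g.R + 0x5d0) v.mem w.mem := hE _ _ (by omega)
  refine
    { entry := hfr.entry
      rip := hrip
      rsp := by rw [hrsp]; exact hfr.rsp
      shadowIdx := by rw [hup.u64 _ (by omega) (by omega) (by omega)]; exact hfr.shadowIdx
      saved_rbx := by rw [hup.u64 _ (by omega) (by omega) (by omega)]; exact hfr.saved_rbx
      saved_rbp := by rw [hup.u64 _ (by omega) (by omega) (by omega)]; exact hfr.saved_rbp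
      saved_r12 := by rw [hup.u64 _ (by omega) (by omega) (by omega)]; exact hfr.saved_r12
      saved_r13 := by rw [hup.u64 _ (by omega) (by omega) (by omega)]; exact hfr.saved_r13
      saved_r14 := by rw [hup.u64 _ (by omega) (by omega) (by omega)]; exact hfr.saved_r14
      saved_r15 := by rw [hup.u64 _ (by omega) (by omega) (by omega)]; exact hfr.saved_r15
      saved_ra := by rw [hup.u64 _ (by omega) (by omega) (by omega)]; exact hfr.saved_ra
      code := ?_
      inv := hinv
      shadow := hfr.shadow.untouched (hE _ _ (by omega))
      offText := hfr.offText
      ext := hfr.ext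
      callers := hfr.callers
      sh7 := ?_
      same := ?_ }
  · show Mem.EqOn Vorbis.L.textLo Vorbis.L.textHi u₀.mem w.mem
    have h1 : Mem.EqOn Vorbis.L.textLo Vorbis.L.textHi u₀.mem v.mem := hfr.code
    exact h1.trans (hE _ _ (by
      have e : Vorbis.L.textHi = 0x119d40 := rfl
      omega))
  · intro k hk
    have hb : Vorbis.Globals.log2_4.beg = 0x120640 := rfl
    have e : (UInt64.ofNat (Vorbis.Globals.log2_4.beg + k)).toNat = 0x120640 + k := by
      rw [hb]
      exact toNat_addr _ (by omega)
    rw [(hE 0x120640 0x120650 (by omega)).readLE _ 1 (by omega) (by omega) (by omega)]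
    exact hfr.sh7 k hk
  · apply hfr.same.trans
    apply hs.mono
    intro s hsm a h1 h2
    have e : s = ⟨g.RA - 1888, g.R⟩ := List.mem_singleton.mp hsm
    subst e
    simp only at h1 h2
    refine ⟨⟨g.RA - depth, g.RA⟩, ?_, ?_, ?_⟩
    · unfold footprint
      exact List.mem_cons_self
    · simp only [depth]
      omega
    · simp only
      omega

/-- **Where the `lengths` array is**: inside the data space, off the stack region (a temp block of the arena for a sparse book, a
setup block for a dense one). -/
theorem lengths_where {g : Ghost} {i : Nat} {A2 A3 Ai : Arena} {A : Arena × List Obj} {v : State} {lengths : Nat}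
    (h : Cur g i A2 A3 Ai A v) (hp : LengthsAt (Since Ai A.1) A v.mem (g.cb v.mem i) lengths) :
    0x100000 ≤ lengths ∧ lengths + (Codebook.entries v.mem (g.cb v.mem i)).toNat ≤ 0xC00000 ∧
      (lengths + (Codebook.entries v.mem (g.cb v.mem i)).toNat ≤ 0x700000 ∨ 0x800000 ≤ lengths) := by
  rcases hp.sparse_01 with h0 | h1
  · have hb := (hp.dense_block h0).1
    have hr := h.sd.arena.block_off hb
    simp only [vblock] at hr
    exact hr
  · have ht := (hp.sparse_temp h1).tblock (p := lengths) (n := (Codebook.entries v.mem (g.cb v.mem i)).toNat)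
      List.mem_cons_self
    exact h.sd.arena.tblock_off ht

/-- **The clauses of `AtC5` / `AtC6` about the book under construction over a change of the stack below `R`**: the struct's fields
and the bytes of `lengths` read the same. -/
theorem book_carry {u₀ : State} {g : Ghost} {pc : Word} {i : Nat} {A2 A3 Ai : Arena} {A : Arena × List Obj} {v w : State}
    {lengths : Nat} (hfr : Frame u₀ g pc A v) (h : Cur g i A2 A3 Ai A v)
    (hp : LengthsAt (Since Ai A.1) A v.mem (g.cb v.mem i) lengths)
    (hs : Mem.SameExcept [⟨g.RA - 1888, g.R⟩] v.mem w.mem) :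
    g.cb w.mem i = g.cb v.mem i ∧ Codebook.SameFields v.mem w.mem (g.cb v.mem i) ∧
      Mem.EqOn lengths (lengths + (Codebook.entries v.mem (g.cb v.mem i)).toNat) v.mem w.mem := by
  obtain ⟨hra8, hralo, hrahi⟩ := hfr.ra
  obtain ⟨hR, hR8⟩ := hfr.r_eq
  simp only [depth, steady] at hralo hR
  have hE : ∀ lo hi, (hi ≤ g.RA - 1888 ∨ g.R ≤ lo) → Mem.EqOn lo hi v.mem w.mem := by
    intro lo hi hd
    apply hs.eqOn lo hi
    intro s hsm
    have e : s = ⟨g.RA - 1888, g.R⟩ := List.mem_singleton.mp hsm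
    subst e
    simp only
    omega
  have hcw := cb_where h
  have hlw := lengths_where h hp
  refine ⟨?_, ?_, ?_⟩
  · have hfw := f_where hfr h
    have hf64 : g.f + Off.sizeof.stb_vorbis ≤ 2 ^ 64 := by
      simp only [voff]
      omega
    have hobjsame : (objBlock g.f).Same v.mem w.mem := by
      apply Block.Same.of_sameExcept hs
      intro s hsm
      have e : s = ⟨g.RA - 1888, g.R⟩ := List.mem_singleton.mp hsm
      subst e
      have e2 : Off.sizeof.stb_vorbis = 1808 := rfl
      simp only [vblock]
      omega
    have heq : ObjEq [(0, 1808)] v.mem g.f w.mem g.f := ObjEq.of_same hobjsame hf64 (by decide)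
    have ecbs : stb_vorbis.codebooks w.mem g.f = stb_vorbis.codebooks v.mem g.f := by
      simp only [vacc, voff]
      exact heq.u64 168 (by decide)
    unfold Ghost.cb
    simp only [stb_vorbis.codebooks_at]
    rw [ecbs]
  · apply Codebook.SameFields.of_same
    · simp only [voff]
      omega
    · apply Block.Same.of_sameExcept hs
      intro s hsm
      have e : s = ⟨g.RA - 1888, g.R⟩ := List.mem_singleton.mp hsm
      subst e
      simp only [voff]
      omega
  · apply hE
    omega

/-- **`InC5` with the program counter as a parameter**: the assertion of the segment's entry (CUR(i), K1, rbx = lengths, L(E),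
ebp = total, where the `lengths` array is, c fresh) at ANY address `pc` of the segment. The dense path (0x114651 … the counting loop)
is reached from the entry `cut109` AND from the conversion (after `c->sparse = 0`): `loop_ok` and `atC6_of` are stated over this
form so that both arrivals use them. -/
structure InC5p (u₀ : State) (pc : Word) (g : Ghost) (i : Nat) (A2 A3 Ai : Arena) (A : Arena × List Obj) (lengths total : Nat)
    (v : State) : Prop where
  frame : Frame u₀ g pc A v
  cur : Cur g i A2 A3 Ai A v
  k1 : Codebook.K1 v.mem (g.cb v.mem i)
  rbx : v.reg .rbx = addr lengths
  rbp : v.reg .rbp = addr total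
  total_le : (total : Int) ≤ Codebook.entries v.mem (g.cb v.mem i)
  lenL : LenL v.mem lengths (Codebook.entries v.mem (g.cb v.mem i)).toNat
  place : LengthsAt (Since Ai A.1) A v.mem (g.cb v.mem i) lengths
  sparse_total : Codebook.sparse v.mem (g.cb v.mem i) = 1 →
    total = usedCount v.mem lengths (Codebook.entries v.mem (g.cb v.mem i)).toNat
  fresh : Fresh7 v.mem (g.cb v.mem i)

/-- The entry assertion is the instance `pc = cut109`. -/
theorem InC5p.of_inC5 {u₀ : State} {g : Ghost} {i : Nat} {A2 A3 Ai : Arena} {A : Arena × List Obj} {lengths total : Nat}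
    {v : State} (h : InC5 u₀ g i A2 A3 Ai A lengths total v) : InC5p u₀ pc_C5 g i A2 A3 Ai A lengths total v :=
  { frame := h.frame
    cur := h.cur
    k1 := h.k1
    rbx := h.rbx
    rbp := h.rbp
    total_le := h.total_le
    lenL := h.lenL
    place := h.place
    sparse_total := h.sparse_total
    fresh := h.fresh }

/-- **The exit assertion `AtC6` from the entry assertion, when only the stack below `R` changed** (the return addresses pushed by the
check calls): the two exits of the segment that make no store of their own — the book stays sparse; the counting loop of a dense
book. `count` is `sorted_count`. -/
theorem atC6_of {u₀ : State} {pc : Word} {g : Ghost} {i : Nat} {A2 A3 Ai : Arena} {A : Arena × List Obj} {lengths total : Nat}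
    {v w : State} (hin : InC5p u₀ pc g i A2 A3 Ai A lengths total v)
    (hs : Mem.SameExcept [⟨g.RA - 1888, g.R⟩] v.mem w.mem) (hrip : w.rip = pc_C6) (hrsp : w.reg .rsp = v.reg .rsp)
    (hinv : abiInv w) (h14 : w.reg .r14 = v.reg .r14) (hbx : w.reg .rbx = v.reg .rbx) (count : Nat)
    (hbp : w.reg .rbp = addr count) (h13 : w.reg .r13 = addr (Codebook.sparse v.mem (g.cb v.mem i)))
    (hsc : Codebook.sparse v.mem (g.cb v.mem i) = 1 →
      count = usedCount v.mem lengths (Codebook.entries v.mem (g.cb v.mem i)).toNat ∧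
        4 * (count : Int) < Codebook.entries v.mem (g.cb v.mem i))
    (hdc : Codebook.sparse v.mem (g.cb v.mem i) = 0 →
      count = longCount v.mem lengths (Codebook.entries v.mem (g.cb v.mem i)).toNat) :
    AtC6 u₀ g i w := by
  obtain ⟨ecb, sf, hEq⟩ := book_carry hin.frame hin.cur hin.place hs
  have hlw := lengths_where hin.cur hin.place
  have hcnt := counts_same hEq (by omega)
  refine ⟨A, lengths, count, A2, A3, Ai, ?_⟩
  refine
    { frame := frame_carry hin.frame pc_C6 hs hrip hrsp hinv
      cur := cur_carry hin.frame hin.cur hs h14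
      k1 := ?_
      r13 := ?_
      rbx := by rw [hbx]; exact hin.rbx
      rbp := hbp
      lenL := ?_
      place := ?_
      sparse_count := ?_
      dense_count := ?_
      fresh := ?_ }
  · rw [ecb]
    exact hin.k1.frame sf
  · rw [ecb, sf.sparse]
    exact h13
  · rw [ecb, sf.entries]
    exact hin.lenL.same hEq (by omega)
  · rw [ecb]
    exact
      { sparse_01 := by rw [sf.sparse]; exact hin.place.sparse_01
        sparse_temp := by rw [sf.sparse, sf.entries]; exact hin.place.sparse_temp
        sparse_null := by rw [sf.sparse, sf.codeword_lengths]; exact hin.place.sparse_null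
        dense_block := by rw [sf.sparse, sf.entries]; exact hin.place.dense_block
        dense_eq := by rw [sf.sparse, sf.codeword_lengths]; exact hin.place.dense_eq
        dense_temps := by rw [sf.sparse]; exact hin.place.dense_temps }
  · rw [ecb, sf.sparse, sf.entries, hcnt.1]
    exact hsc
  · rw [ecb, sf.sparse, sf.entries, hcnt.2]
    exact hdc
  · rw [ecb]
    exact
      { lookup_type := by rw [sf.lookup_type]; exact hin.fresh.lookup_type
        lookup_values := by rw [sf.lookup_values]; exact hin.fresh.lookup_values
        multiplicands := by rw [sf.multiplicands]; exact hin.fresh.multiplicands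
        sorted_codewords := by rw [sf.sorted_codewords]; exact hin.fresh.sorted_codewords
        sorted_values := by rw [sf.sorted_values]; exact hin.fresh.sorted_values
        codewords := by rw [sf.codewords]; exact hin.fresh.codewords
        sorted_entries := by rw [sf.sorted_entries]; exact hin.fresh.sorted_entries }

/-- `(x >> 2)` of a non-negative 32-bit `int`, as a number. -/
theorem sar2_toInt (E : Nat) (hE : E < 2 ^ 31) : ((BitVec.ofNat 32 E).sshiftRight 2).toInt = ((E / 4 : Nat) : Int) := by
  have hn : (BitVec.ofNat 32 E).toNat = E := toNat_ofNat32 E (by omega)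
  have hm : (BitVec.ofNat 32 E).msb = false := by
    rw [BitVec.msb_eq_decide, hn]
    simp only [decide_eq_false_iff_not, Nat.not_le]
    omega
  have h2 : ((BitVec.ofNat 32 E).sshiftRight 2).toNat = E / 4 := by
    rw [BitVec.toNat_sshiftRight_of_msb_false hm, hn, Nat.shiftRight_eq_div_pow]
  rw [toInt_of_lt _ (by rw [h2]; omega), h2]

/-- The low half of a register that holds a small number, as a signed `int`. -/
theorem part32_addr_toInt (t : Nat) (ht : t < 2 ^ 31) : (Word.part .w32 (addr t)).toInt = (t : Int) := by
  have hn : (Word.part .w32 (addr t)).toNat = t := by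
    rw [Vorbis.toNat_part32, toNat_addr t (by omega)]
    omega
  rw [toInt_of_lt _ (by rw [hn]; exact ht), hn]

/-- `add r32, 1` on a register that holds a small number. -/
theorem ofBV_part32_add_one (n : Nat) (h : n + 1 < 2 ^ 32) : Word.ofBV (Word.part .w32 (addr n) + 1#32) = addr (n + 1) := by
  have hn : (Word.part .w32 (addr n)).toNat = n := by
    rw [Vorbis.toNat_part32, toNat_addr n (by omega)]
    omega
  apply eq_addr
  rw [Vorbis.toNat_ofBV32, BitVec.toNat_add, hn]
  simp only [BitVec.toNat_ofNat]
  omega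

/-- `movsxd r64, r32` of a small number, plus a pointer: the address of `p[n]` for a byte array. -/
theorem sext_add (n p : Nat) (h : n < 2 ^ 31) (hp : p + n < 2 ^ 64) :
    Word.ofBV (BitVec.signExtend 64 (Word.part .w32 (addr n))) + addr p = addr (p + n) := by
  have hn : (Word.part .w32 (addr n)).toNat = n := by
    rw [Vorbis.toNat_part32, toNat_addr n (by omega)]
    omega
  have h1 := toNat_sext32 (Word.part .w32 (addr n)) (by rw [hn]; exact h)
  rw [hn] at h1
  have h2 := toNat_addr p (by omega)
  apply eq_addr
  generalize Word.ofBV (BitVec.signExtend 64 (Word.part .w32 (addr n))) = a at h1 ⊢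
  generalize addr p = q at h2 ⊢
  u_omega

/-- The test `sub eax, 0xb ; cmp al, 0xf3 ; ja` of line 3819 on a byte: taken iff the byte is NOT in `[11, 254]`. -/
theorem long_test : ∀ b : Fin 256,
    (243 < (BitVec.setWidth 8 (BitVec.zeroExtend 32 (BitVec.ofNat 8 b.val) - 11#32)).toNat) ↔ ¬ (11 ≤ b.val ∧ b.val ≤ 254) := by
  decide

/-- **The invariant of the counting loop 3818** (head 0x11484a, a dense book), relative to the state `v` at the segment's entry:
only the stack below `R` has changed since; r12d = j ≤ E; ebp = #{j' < j : 11 ≤ lengths[j'] ≤ 254}; r13 = 0 = SP; r14, rbx, rsp as at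
the entry. -/
structure Head (g : Ghost) (i lengths : Nat) (v s : State) (j : Nat) : Prop where
  same : Mem.SameExcept [⟨g.RA - 1888, g.R⟩] v.mem s.mem
  rip : s.rip = Vorbis.L.start_decoder.loop10
  rsp : s.reg .rsp = v.reg .rsp
  inv : abiInv s
  r14 : s.reg .r14 = v.reg .r14
  rbx : s.reg .rbx = v.reg .rbx
  r13 : s.reg .r13 = addr 0
  r12 : s.reg .r12 = addr j
  j_le : (j : Int) ≤ Codebook.entries v.mem (g.cb v.mem i)
  rbp : s.reg .rbp = addr (longCount v.mem lengths j)

/-- **The counting loop of a dense book reaches `AtC6`.** -/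
theorem loop_ok {Lay : Layout} (hLay : Lay.hi = 0x1000000) {μ : Microarch} (hμ : UserX.MicroOK μ) {u₀ : State}
    (hcode : HasCodeNat Lay u₀ Vorbis.L.start_decoder.entry Vorbis.Code.code_start_decoder.nat Vorbis.L.start_decoder.size)
    (hload1 : Asan.SmallCheck Lay μ Vorbis.WayInv (Vorbis.CodeOK u₀) [.rax, .rdx] 1 Vorbis.L.__asan_load1_noabort.entry)
    (hload4 : Asan.SmallCheck Lay μ Vorbis.WayInv (Vorbis.CodeOK u₀) [.rax, .rcx, .rdx] 4 Vorbis.L.__asan_load4_noabort.entry)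
    {pc : Word} {g : Ghost} {i : Nat} {A2 A3 Ai : Arena} {A : Arena × List Obj} {lengths total : Nat} {v : State}
    (hin : InC5p u₀ pc g i A2 A3 Ai A lengths total v) (hsp0 : Codebook.sparse v.mem (g.cb v.mem i) = 0) :
    ∀ s, (∃ j, Head g i lengths v s j) →
      ReachVia Lay μ Vorbis.WayInv s (fun w => AtC6 u₀ g i w ∨ AtERR u₀ g w) := by
  apply ReachVia.loop (fun s => (Codebook.entries v.mem (g.cb v.mem i)).toNat - (s.reg .r12).toNat)
  intro s hinv
  obtain ⟨j, hh⟩ := hinv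
  have hfr := hin.frame
  have hcur := hin.cur
  have he := hfr.entry
  v_entry he
  clear he_rip he_eq he_df he_mx he_sse he_code he_inv
  have hRA : g.RA = (g.e.reg .rsp).toNat := rfl
  simp only [depth] at he_room he_stack
  generalize hge : g.e = e at he_retAddr he_align he_room he_top he_stack hRA
  have v_rsp : v.reg .rsp = e.reg .rsp - 1480 := by
    rw [hfr.rsp]
    unfold Ghost.R addr steady
    rw [hRA]
    u_omega
  have hfr' := frame_carry hfr Vorbis.L.start_decoder.loop10 hh.same hh.rip hh.rsp hh.inv
  obtain ⟨ecb, sf, hEq⟩ := book_carry hfr hcur hin.place hh.same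
  have w_rip := hh.rip
  have c_rsp : s.reg .rsp = e.reg .rsp - 1480 := hh.rsp.trans v_rsp
  have w_eq : Mem.EqOn Vorbis.L.textLo Vorbis.L.textHi u₀.mem s.mem := hfr'.code
  have hdf : s.flags .df = false := (show abiInv _ from hh.inv).1
  have hmx : s.mxcsr &&& 0x1F80 = 0x1F80 := (show abiInv _ from hh.inv).2
  have hsse := Vorbis.sseOK_of_abiInv hh.inv
  obtain ⟨E, hE⟩ : ∃ E : Nat, Codebook.entries v.mem (g.cb v.mem i) = (E : Int) :=
    ⟨(Codebook.entries v.mem (g.cb v.mem i)).toNat, (Int.toNat_of_nonneg hin.k1.ent_nonneg).symm⟩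
  have hE_lt : E < 16777216 := by
    have := hin.k1.ent_lt
    omega
  have hjE : j ≤ E := by
    have := hh.j_le
    omega
  have hc_where := cb_where hcur
  have hl_where := lengths_where hcur hin.place
  obtain ⟨cw, hcw⟩ : ∃ cw : Word, addr (g.cb v.mem i) = cw := ⟨_, rfl⟩
  have hcwn : cw.toNat = g.cb v.mem i := by
    rw [← hcw]
    exact toNat_addr _ (by omega)
  obtain ⟨lw, hlw⟩ : ∃ lw : Word, addr lengths = lw := ⟨_, rfl⟩
  have hlwn : lw.toNat = lengths := by
    rw [← hlw]
    exact toNat_addr _ (by omega)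
  have c_r14 : s.reg .r14 = cw := by
    rw [hh.r14, hcur.r14, hcw]
  have c_rbx : s.reg .rbx = lw := by
    rw [hh.rbx, hin.rbx, hlw]
  have c_r12 := hh.r12
  have c_r13 := hh.r13
  have c_rbp := hh.rbp
  have l_en : s.mem.readLE (cw + 4) 4 = E := by
    rw [← hcw]
    simp only [vfield]
    have h1 := Mem.u32_of_i32_nonneg s.mem (g.cb v.mem i + 4)
    have h2 := sf.entries
    simp only [vacc, voff] at hE h2
    rw [h2, hE] at h1
    exact h1 (by omega)
  rw [← hcwn] at hc_where
  rw [hE, ← hlwn] at hl_where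
  simp only [Int.toNat_natCast] at hl_where
  -- the byte `lengths[j]`, named (it is loaded only when `j < E`)
  have hjw : Word.ofBV (BitVec.signExtend 64 (Word.part .w32 (addr j))) + lw = addr (lengths + j) := by
    rw [← hlw]
    exact sext_add j lengths (by omega) (by omega)
  have hsame := hh.same
  -- the byte loaded at 0x11486b, read through the return address the check call pushed
  have hbyte : ∀ x, j < E → ((s.mem.writeLE (e.reg .rsp - 1488) 8 x).readLE
      (Word.ofBV (BitVec.signExtend 64 (Word.part .w32 (addr j))) + lw) 1) = v.mem.u8 (lengths + j) := by
    intro x hj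
    rw [hjw]
    have hn := toNat_addr (lengths + j) (by omega)
    rw [X86.User.Mem.readLE_writeLE_disjoint_noWrap _ _ _ _ _ _ ?_ ?_ ?_]
    · simp only [vfield]
      exact hEq.u8 (lengths + j) (by omega) (by rw [hE]; simp only [Int.toNat_natCast]; omega) (by omega)
    · unfold X86.User.Mem.NoWrap
      u_omega
    · unfold X86.User.Mem.NoWrap
      rw [hn]
      omega
    · rw [hn, ← hlwn]
      u_omega
  -- a return address pushed below `R` stays inside the window
  have hpush : ∀ x, Mem.SameExcept [⟨g.RA - 1888, g.R⟩] v.mem (s.mem.writeLE (e.reg .rsp - 1488) 8 x) := by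
    intro x
    refine hsame.step_writeLE _ 8 x (by u_omega) ⟨_, List.mem_singleton.mpr rfl, ?_, ?_⟩
    · simp only
      rw [hRA]
      u_omega
    · simp only
      unfold Ghost.R steady
      rw [hRA]
      u_omega
  have hcnt_le := longCount_le v.mem lengths j
  u_walk hcode [hμ.vendor] until [Vorbis.L.start_decoder.cut113, Vorbis.L.start_decoder.loop10] span [Vorbis.L.textLo, Vorbis.L.textHi] side (v_side)
  case check_11484e =>
    -- 0x11484e, load4 [c + 4] (`c->entries`)
    have hun : ShadowUntouched s.mem s_11484e.mem := by v_untouched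
    refine Vorbis.Spec.check_site hfr'.shadow hun (cb_site hcur 4 4 (by omega) (by omega)) ?_
    u_omega
  case check_114866 =>
    -- 0x114866, load1 [lengths + j], `j < E`: inside the block of `lengths` (a dense book: a setup block)
    have hjlt : j < E := by
      rw [part32_addr_toInt j (by omega), toInt_of_lt _ (by rw [toNat_ofNat32 E (by omega)]; omega),
        toNat_ofNat32 E (by omega)] at hbr_114857
      omega
    have hun : ShadowUntouched s.mem s_114866.mem := by v_untouched
    have hblk : (g.Blk A) ⟨lengths, (Codebook.entries v.mem (g.cb v.mem i)).toNat⟩ :=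
      up g A _ (hin.place.dense_block hsp0).1
    have hsite : Site (g.Live A) (lengths + j) 1 := by
      apply Site.of_blk hcur.sd.env.live hblk
      · simp only []
        omega
      · simp only []
        rw [hE]
        simp only [Int.toNat_natCast]
        omega
      · omega
    refine Vorbis.Spec.check_site hfr'.shadow hun hsite ?_
    rw [hjw]
    exact toNat_addr _ (by omega)
  case cont =>
    -- 0x114857 `jle` taken: `E ≤ j`, the loop is left for 0x114668 = `AtC6`
    have hjE' : j = E := by
      rw [part32_addr_toInt j (by omega), toInt_of_lt _ (by rw [toNat_ofNat32 E (by omega)]; omega),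
        toNat_ofNat32 E (by omega)] at hbr_114857
      omega
    refine ReachVia.done (Or.inl (Or.inl ?_))
    refine atC6_of hin (by rw [w_mem]; exact hpush _) w_rip (w_rsp.trans v_rsp.symm) ?_
      ((w_kept.get .r14 rfl).trans hh.r14) ((w_kept.get .rbx rfl).trans hh.rbx) (longCount v.mem lengths j) ?_ ?_ ?_ ?_
    · v_inv
    · rw [w_kept.get .rbp rfl]
      exact c_rbp
    · rw [w_kept.get .r13 rfl, c_r13, hsp0]
    · intro h1
      rw [hsp0] at h1
      exact absurd h1 (by decide)
    · intro _
      rw [hE, hjE']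
      simp only [Int.toNat_natCast]
  case cont =>
    -- the back edge, `lengths[j]` not counted
    have hjlt : j < E := by
      rw [part32_addr_toInt j (by omega), toInt_of_lt _ (by rw [toNat_ofNat32 E (by omega)]; omega),
        toNat_ofNat32 E (by omega)] at hbr_114857
      omega
    rw [hbyte _ hjlt] at hbr_114874
    have hnot : ¬ (11 ≤ v.mem.u8 (lengths + j) ∧ v.mem.u8 (lengths + j) ≤ 254) :=
      (long_test ⟨v.mem.u8 (lengths + j), Mem.u8_lt _ _⟩).mp hbr_114874
    have e12 : s_114846.reg .r12 = addr (j + 1) := by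
      rw [w_r12]
      exact ofBV_part32_add_one j (by omega)
    refine ReachVia.done (Or.inr ⟨⟨j + 1, ?_⟩, ?_⟩)
    · exact
        { same := by rw [w_mem]; exact hpush _
          rip := w_rip
          rsp := w_rsp.trans v_rsp.symm
          inv := by v_inv
          r14 := (w_kept.get .r14 rfl).trans hh.r14
          rbx := (w_kept.get .rbx rfl).trans hh.rbx
          r13 := (w_kept.get .r13 rfl).trans c_r13
          r12 := e12
          j_le := by rw [hE]; omega
          rbp := by rw [w_kept.get .rbp rfl, c_rbp, longCount_succ_short hnot] }
    · rw [e12, toNat_addr _ (by omega), toNat_addr _ (by omega), hE]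
      simp only [Int.toNat_natCast]
      omega
  case cont =>
    -- the back edge, `lengths[j]` counted: `++sorted_count`
    have hjlt : j < E := by
      rw [part32_addr_toInt j (by omega), toInt_of_lt _ (by rw [toNat_ofNat32 E (by omega)]; omega),
        toNat_ofNat32 E (by omega)] at hbr_114857
      omega
    rw [hbyte _ hjlt] at hbr_114874
    have hlong : 11 ≤ v.mem.u8 (lengths + j) ∧ v.mem.u8 (lengths + j) ≤ 254 := by
      apply Classical.byContradiction
      intro hn
      have := (long_test ⟨v.mem.u8 (lengths + j), Mem.u8_lt _ _⟩).mpr hn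
      exact absurd this (Nat.not_lt.mpr hbr_114874)
    have e12 : s_114846.reg .r12 = addr (j + 1) := by
      rw [w_r12]
      exact ofBV_part32_add_one j (by omega)
    refine ReachVia.done (Or.inr ⟨⟨j + 1, ?_⟩, ?_⟩)
    · exact
        { same := by rw [w_mem]; exact hpush _
          rip := w_rip
          rsp := w_rsp.trans v_rsp.symm
          inv := by v_inv
          r14 := (w_kept.get .r14 rfl).trans hh.r14
          rbx := (w_kept.get .rbx rfl).trans hh.rbx
          r13 := (w_kept.get .r13 rfl).trans c_r13
          r12 := e12
          j_le := by rw [hE]; omega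
          rbp := by
            rw [w_rbp, longCount_succ_long hlong]
            exact ofBV_part32_add_one _ (by omega) }
    · rw [e12, toNat_addr _ (by omega), toNat_addr _ (by omega), hE]
      simp only [Int.toNat_natCast]
      omega

/-- **`*f` lies above the own frame** (it is an object of a caller's protected frame: above the return-address slot), or off the
stack region. What reads a spill slot of the own frame through a store into `*f`. -/
theorem f_above {u₀ : State} {g : Ghost} {pc : Word} {A : Arena × List Obj} {v : State}
    (hfr : Frame u₀ g pc A v) (hh : g.Hand A) :
    g.RA + 8 ≤ g.f ∨ g.f + 1808 ≤ 0x700000 ∨ 0x800000 ≤ g.f := by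
  obtain ⟨o, ho, h1, h2⟩ := hh.obj
  simp only [voff] at h2
  rcases List.mem_append.mp ho with hs | hoth
  · left
    unfold stackObjs at hs
    obtain ⟨bF, hbF, hob⟩ := List.mem_flatMap.mp hs
    unfold FrameLayout.objsAt at hob
    obtain ⟨fo, _, hfo⟩ := List.mem_map.mp hob
    have hc := hfr.callers bF hbF
    rw [← hfo] at h1
    simp only at h1
    omega
  · right
    have hoff := hfr.shadow.off o hoth
    unfold OffStack at hoff
    omega

/-- **THE CUT ASSERTION at the call of `setup_malloc` (0x1145e4, entered: rip = the callee's entry, the return address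
0x1145e9 = `cut110` pushed)**, relative to the state `v` at the segment's entry (which satisfies `InC5`): the book is sparse and is
going to be converted (`E >> 2 ≤ total`); since `v` only the stack below `R` and `f->setup_temp_memory_required` (`[f+16, f+20)`)
have changed; rdi = f, esi = E; r14, rbx, rbp as at the entry. -/
structure AtMalloc (g : Ghost) (i total : Nat) (v s : State) : Prop where
  same : Mem.SameExcept [⟨g.RA - 1888, g.R⟩, ⟨g.f + 16, g.f + 20⟩] v.mem s.mem
  rip : s.rip = Vorbis.L.setup_malloc.entry
  rsp : s.reg .rsp = v.reg .rsp - 8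
  ret : s.mem.readLE (s.reg .rsp) 8 = Vorbis.L.start_decoder.cut110.toNat
  inv : abiInv s
  rdi : s.reg .rdi = addr g.f
  rsi : s.reg .rsi = addr (Codebook.entries v.mem (g.cb v.mem i)).toNat
  r14 : s.reg .r14 = v.reg .r14
  rbx : s.reg .rbx = v.reg .rbx
  rbp : s.reg .rbp = v.reg .rbp
  sparse1 : Codebook.sparse v.mem (g.cb v.mem i) = 1
  convert : (Codebook.entries v.mem (g.cb v.mem i)).toNat / 4 ≤ total

/-- **Segment `C5` up to the call of `setup_malloc`**: from the entry assertion `InC5` the machine reaches `AtC6` (the book stays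
sparse: 0x114668 directly; a dense book: through the counting loop 3818), or the call of `setup_malloc` of the sparse → dense
conversion with `AtMalloc`. Seven of the eleven check sites of the segment are on these paths. -/
theorem entry_ok {Lay : Layout} (hLay : Lay.hi = 0x1000000) {μ : Microarch} (hμ : UserX.MicroOK μ) {u₀ : State}
    (hcode : HasCodeNat Lay u₀ Vorbis.L.start_decoder.entry Vorbis.Code.code_start_decoder.nat Vorbis.L.start_decoder.size)
    (hload1 : Asan.SmallCheck Lay μ Vorbis.WayInv (Vorbis.CodeOK u₀) [.rax, .rdx] 1 Vorbis.L.__asan_load1_noabort.entry)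
    (hload4 : Asan.SmallCheck Lay μ Vorbis.WayInv (Vorbis.CodeOK u₀) [.rax, .rcx, .rdx] 4 Vorbis.L.__asan_load4_noabort.entry)
    {g : Ghost} {i : Nat} {A2 A3 Ai : Arena} {A : Arena × List Obj} {lengths total : Nat} {v : State}
    (hin : InC5 u₀ g i A2 A3 Ai A lengths total v) :
    ReachVia Lay μ Vorbis.WayInv v (fun w => (AtC6 u₀ g i w ∨ AtERR u₀ g w) ∨ AtMalloc g i total v w) := by
  have hfr := hin.frame
  have hcur := hin.cur
  have he := hfr.entry
  v_entry he
  clear he_rip he_eq he_df he_mx he_sse he_code he_inv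
  have hRA : g.RA = (g.e.reg .rsp).toNat := rfl
  simp only [depth] at he_room he_stack
  generalize hge : g.e = e at he_retAddr he_align he_room he_top he_stack hRA
  have w_rip := hfr.rip
  have c_rsp : v.reg .rsp = e.reg .rsp - 1480 := by
    rw [hfr.rsp]
    unfold Ghost.R addr steady
    rw [hRA]
    u_omega
  have c_r14 := hcur.r14
  have c_rbx := hin.rbx
  have c_rbp := hin.rbp
  have w_eq : Mem.EqOn Vorbis.L.textLo Vorbis.L.textHi u₀.mem v.mem := hfr.code
  have hdf : v.flags .df = false := (show abiInv _ from hfr.inv).1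
  have hmx : v.mxcsr &&& 0x1F80 = 0x1F80 := (show abiInv _ from hfr.inv).2
  have hsse := Vorbis.sseOK_of_abiInv hfr.inv
  obtain ⟨E, hE⟩ : ∃ E : Nat, Codebook.entries v.mem (g.cb v.mem i) = (E : Int) :=
    ⟨(Codebook.entries v.mem (g.cb v.mem i)).toNat, (Int.toNat_of_nonneg hin.k1.ent_nonneg).symm⟩
  have hE_lt : E < 16777216 := by
    have := hin.k1.ent_lt
    omega
  have l_sp : v.mem.readLE (addr (g.cb v.mem i) + 27) 1 = Codebook.sparse v.mem (g.cb v.mem i) := by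
    simp only [vfield, vacc, voff]
  have l_en : v.mem.readLE (addr (g.cb v.mem i) + 4) 4 = E := by
    simp only [vfield]
    have h1 := Mem.u32_of_i32_nonneg v.mem (g.cb v.mem i + 4)
    simp only [vacc, voff] at hE
    rw [hE] at h1
    exact h1 (by omega)
  -- where the codebook struct is
  have hL := hcur.sd.env.live
  have hcbok : CodebooksOK (g.Blk A) v.mem g.f := ((hcur.sd.cb0 (by omega)).1).ok (hcur.sd.cb0 (by omega)).2
  have hcbA : A.1.Blk (codebooksBlock v.mem g.f) := (hcur.ages.F2.1.mono hcur.ages.ext3).mono hcur.ages.exti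
  have hcb_in := hcbok.cb_in i hcur.lt
  have hcb_off := hcur.sd.arena.blk_off_stack hcbA
  have hcb_rng := hcur.sd.arena.block_off hcbA
  have hc_where : 0x100000 ≤ g.cb v.mem i ∧ g.cb v.mem i + 2120 ≤ 0xC00000 ∧
      (g.cb v.mem i + 2120 ≤ 0x700000 ∨ 0x800000 ≤ g.cb v.mem i) := by
    unfold Ghost.cb
    simp only [vblock, voff] at hcb_in hcb_rng ⊢
    omega
  clear hcb_off hcb_rng
  obtain ⟨cw, hcw⟩ : ∃ cw : Word, addr (g.cb v.mem i) = cw := ⟨_, rfl⟩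
  have hcwn : cw.toNat = g.cb v.mem i := by
    rw [← hcw]
    exact toNat_addr _ (by omega)
  rw [hcw] at c_r14 l_sp l_en
  rw [← hcwn] at hc_where
  have hsite_c : ∀ off n, off + n ≤ 2120 → 1 ≤ n → Site (g.Live A) (g.cb v.mem i + off) n := by
    intro off n h1 h2
    exact CodebooksOK.site_cb_field hL hcbok i hcur.lt off n (by simp only [voff]; omega) h2 rfl
  have hR : g.R + 1480 = g.RA := hfr.r_eq.1
  -- the literal 0 of dword [R+24H] (Z24), the spill of f at qword [R+18H]
  have l_z24 : v.mem.readLE (e.reg .rsp - 1444) 4 = 0 := by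
    have ea : e.reg .rsp - 1444 = addr (g.R + 0x24) := by
      unfold addr
      rw [hRA] at hR
      u_omega
    rw [ea]
    simp only [vfield]
    exact hcur.sd.frame.z24 (by omega) (by omega)
  have l_f : v.mem.readLE (e.reg .rsp - 1456) 8 = g.f := by
    have ea : e.reg .rsp - 1456 = addr (g.R + 0x18) := by
      unfold addr
      rw [hRA] at hR
      u_omega
    rw [ea]
    simp only [vfield]
    exact hcur.slot_f
  have hf_where := f_where hfr hcur
  have hRn : g.R = (e.reg .rsp).toNat - 1480 := by
    rw [hRA] at hR
    omega
  rw [hRn] at hf_where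
  have hf_above := f_above hfr hcur.hand
  rw [hRA] at hf_above
  -- the struct `cb(i)` (in the arena) and `*f` (outside it) do not meet
  have hcf : cw.toNat + 2120 ≤ g.f ∨ g.f + 1808 ≤ cw.toNat := by
    have ho := hcur.objOut
    have hi := arena_inside hcur.sd.arena hcbA
    rw [hcwn]
    unfold Ghost.cb
    simp only [vblock, voff] at hcb_in hi ho ⊢
    omega
  have hsp_lt : Codebook.sparse v.mem (g.cb v.mem i) < 2 := by
    rcases hin.place.sparse_01 with h0 | h1
    · omega
    · omega
  u_walk hcode [hμ.vendor] until [Vorbis.L.start_decoder.cut113, Vorbis.L.start_decoder.loop10, Vorbis.L.start_decoder.cut4] span [Vorbis.L.textLo, Vorbis.L.textHi] side (v_side)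
  case check_114598 =>
    have hun : ShadowUntouched v.mem s_114598.mem := by v_untouched
    refine Vorbis.Spec.check_site hfr.shadow hun (hsite_c 27 1 (by omega) (by omega)) ?_
    u_omega
  case check_114655 =>
    have hun : ShadowUntouched v.mem s_114655.mem := by v_untouched
    refine Vorbis.Spec.check_site hfr.shadow hun (hsite_c 27 1 (by omega) (by omega)) ?_
    u_omega
  case check_1145ac =>
    have hun : ShadowUntouched v.mem s_1145ac.mem := by v_untouched
    refine Vorbis.Spec.check_site hfr.shadow hun (hsite_c 4 4 (by omega) (by omega)) ?_
    u_omega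
  case check_114655 =>
    have hun : ShadowUntouched v.mem s_114655.mem := by v_untouched
    refine Vorbis.Spec.check_site hfr.shadow hun (hsite_c 27 1 (by omega) (by omega)) ?_
    u_omega
  case check_1145cc =>
    -- 0x1145cc, load4 [f + 16] (`f->setup_temp_memory_required`): a field of `*f`
    have hun : ShadowUntouched v.mem s_1145cc.mem := by v_untouched
    have hs := (Bits.ob1 hcur.sd.bits).site hL 16 4 (by simp only [voff]; omega) (by omega) rfl
    refine Vorbis.Spec.check_site hfr.shadow hun hs ?_
    u_omega
  case cont =>
    -- a dense book: on to the counting loop (head 0x11484a) with j = 0, sorted_count = 0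
    have hsp0 : Codebook.sparse v.mem (g.cb v.mem i) = 0 := by omega
    have hs : Mem.SameExcept [⟨g.RA - 1888, g.R⟩] v.mem s_114844.mem := by
      rw [w_mem]
      apply Mem.SameExcept.writeLE
      · u_omega
      · refine ⟨_, List.mem_singleton.mpr rfl, ?_, ?_⟩
        · simp only
          rw [hRA]
          u_omega
        · simp only
          unfold Ghost.R steady
          rw [hRA]
          u_omega
    refine (loop_ok hLay hμ hcode hload1 hload4 (InC5p.of_inC5 hin) hsp0 s_114844 ⟨0, ?_⟩).mono (fun w hw => Or.inl hw)
    exact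
      { same := hs
        rip := w_rip
        rsp := w_rsp.trans c_rsp.symm
        inv := by v_inv
        r14 := w_kept.get .r14 rfl
        rbx := w_kept.get .rbx rfl
        r13 := by
          rw [w_r13, hsp0]
          rfl
        r12 := by
          rw [w_r12]
          rfl
        j_le := by
          have := hin.k1.ent_nonneg
          omega
        rbp := by
          rw [w_rbp]
          rfl }
  case cont =>
    -- dead: SP = 0 at 0x1145a2, SP ≠ 0 at 0x114662
    exfalso
    rcases hin.place.sparse_01 with h0 | h1
    · rw [h0] at hbr_114662
      exact hbr_114662 (by decide)
    · rw [h1] at hbr_1145a2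
      exact absurd hbr_1145a2 (by decide)
  case cont =>
    -- dead: SP ≠ 0 at 0x1145a2, SP = 0 at 0x114662
    exfalso
    rcases hin.place.sparse_01 with h0 | h1
    · rw [h0] at hbr_1145a2
      exact hbr_1145a2 rfl
    · rw [h1] at hbr_114662
      exact absurd hbr_114662 (by decide)
  case cont =>
    -- 0x114668: the book stays sparse
    have hsp1 : Codebook.sparse v.mem (g.cb v.mem i) = 1 := by
      rcases hin.place.sparse_01 with h0 | h1
      · rw [h0] at hbr_1145a2
        exact absurd rfl hbr_1145a2
      · exact h1
    have hs : Mem.SameExcept [⟨g.RA - 1888, g.R⟩] v.mem s_114662.mem := by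
      rw [w_mem]
      apply Mem.SameExcept.writeLE
      · u_omega
      · refine ⟨_, List.mem_singleton.mpr rfl, ?_, ?_⟩
        · simp only
          rw [hRA]
          u_omega
        · simp only
          unfold Ghost.R steady
          rw [hRA]
          u_omega
    refine ReachVia.done (Or.inl (Or.inl ?_))
    refine atC6_of (InC5p.of_inC5 hin) hs w_rip (w_rsp.trans c_rsp.symm) ?_ (w_kept.get .r14 rfl) (w_kept.get .rbx rfl) total ?_ ?_ ?_ ?_
    · v_inv
    · rw [w_kept.get .rbp rfl]
      exact c_rbp
    · rw [w_r13]
      simp only [vacc, voff]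
      exact Mem.ofBV_zeroExtend32_u8 _ _
    · intro _
      refine ⟨hin.sparse_total hsp1, ?_⟩
      rw [part32_addr_toInt total (by have := hin.total_le; omega), sar2_toInt E (by omega)] at hbr_1145bd
      rw [hE]
      omega
    · intro h0
      rw [hsp1] at h0
      exact absurd h0 (by decide)
  case cont =>
    -- the call of `setup_malloc`, `E ≤ setup_temp_memory_required`: no store
    have hsp1 : Codebook.sparse v.mem (g.cb v.mem i) = 1 := by omega
    refine ReachVia.done (Or.inr ?_)
    exact
      { same := by
          rw [hRA, hRn]
          u_same
        rip := w_rip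
        rsp := by
          rw [w_rsp, c_rsp]
          u_omega
        ret := by
          rw [w_rsp, w_mem]
          u_read
        inv := by v_inv
        rdi := w_rdi
        rsi := by
          rw [w_rsi, hE]
          simp only [Int.toNat_natCast]
          apply eq_addr
          rw [Vorbis.toNat_ofBV32, toNat_ofNat32 E (by omega)]
        r14 := w_kept.get .r14 rfl
        rbx := w_kept.get .rbx rfl
        rbp := w_kept.get .rbp rfl
        sparse1 := hsp1
        convert := by
          rw [part32_addr_toInt total (by have := hin.total_le; omega), sar2_toInt E (by omega)] at hbr_1145bd
          rw [hE]
          simp only [Int.toNat_natCast]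
          omega }
  case cont =>
    -- the call of `setup_malloc` after the store `f->setup_temp_memory_required = c->entries` (0x1145d7)
    have hsp1 : Codebook.sparse v.mem (g.cb v.mem i) = 1 := by omega
    refine ReachVia.done (Or.inr ?_)
    exact
      { same := by
          rw [hRA, hRn]
          u_same
        rip := w_rip
        rsp := by
          rw [w_rsp, c_rsp]
          u_omega
        ret := by
          rw [w_rsp, w_mem]
          u_read
        inv := by v_inv
        rdi := w_rdi
        rsi := by
          rw [w_rsi, hE]
          simp only [Int.toNat_natCast]
          apply eq_addr
          rw [Vorbis.toNat_ofBV32, toNat_ofNat32 E (by omega)]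
        r14 := w_kept.get .r14 rfl
        rbx := w_kept.get .rbx rfl
        rbp := w_kept.get .rbp rfl
        sparse1 := hsp1
        convert := by
          rw [part32_addr_toInt total (by have := hin.total_le; omega), sar2_toInt E (by omega)] at hbr_1145bd
          rw [hE]
          simp only [Int.toNat_natCast]
          omega }

/-- **The cut assertion `AtMalloc` gives `setup_malloc`'s `AtEntry` and its precondition `ArenaPre`**: the call returns
(to `cut110` = 0x1145e9) with the callee's `Returned` — its postcondition for the ghost arena `A.1` and the object list `A.2`. -/
theorem malloc_ret {Lay : Layout} {μ : Microarch} {u₀ : State}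
    (hmalloc : ∀ (others : List Obj) (frames : List (Nat × FrameLayout)) (A : Arena),
      Calls Lay μ Vorbis.WayInv (Vorbis.conv u₀) Vorbis.L.setup_malloc.entry (Vorbis.Spec.setup_malloc.spec others frames A))
    {g : Ghost} {i : Nat} {A2 A3 Ai : Arena} {A : Arena × List Obj} {lengths total : Nat} {v s : State}
    (hin : InC5 u₀ g i A2 A3 Ai A lengths total v) (hm : AtMalloc g i total v s) :
    ReachVia Lay μ Vorbis.WayInv s
      (Returned (Vorbis.conv u₀) (Vorbis.Spec.setup_malloc.spec A.2 g.frames' A.1) s Vorbis.L.start_decoder.cut110) := by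
  have hfr := hin.frame
  have hcur := hin.cur
  obtain ⟨hra8, hralo, hrahi⟩ := hfr.ra
  obtain ⟨hR, hR8⟩ := hfr.r_eq
  simp only [depth, steady] at hralo hR
  have hfw := f_where hfr hcur
  have hfa := f_above hfr hcur.hand
  have hf64 : g.f + Off.sizeof.stb_vorbis ≤ 2 ^ 64 := by
    simp only [voff]
    omega
  -- the two windows, as arithmetic
  have hwin : ∀ w, w ∈ [(⟨g.RA - 1888, g.R⟩ : Span), ⟨g.f + 16, g.f + 20⟩] →
      (g.RA - 1888 ≤ w.lo ∧ w.hi ≤ g.R) ∨ (g.f + 16 ≤ w.lo ∧ w.hi ≤ g.f + 20) := by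
    intro w hw
    simp only [List.mem_cons, List.mem_nil_iff, or_false] at hw
    rcases hw with rfl | rfl
    · exact Or.inl ⟨Nat.le_refl _, Nat.le_refl _⟩
    · exact Or.inr ⟨Nat.le_refl _, Nat.le_refl _⟩
  have hE : ∀ lo hi, ((hi ≤ g.RA - 1888 ∨ g.R ≤ lo) ∧ (hi ≤ g.f + 16 ∨ g.f + 20 ≤ lo)) → Mem.EqOn lo hi v.mem s.mem := by
    intro lo hi hd
    apply hm.same.eqOn lo hi
    intro w hw
    have := hwin w hw
    omega
  -- the stack pointer at the callee's entry
  have hrsp : (s.reg .rsp).toNat = g.R - 8 := by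
    have h1 := hm.rsp
    have h2 := hfr.rsp
    rw [h2] at h1
    have h3 := toNat_addr g.R (by omega)
    generalize addr g.R = r at h1 h3
    generalize s.reg .rsp = x at h1 ⊢
    u_omega
  have hun : ShadowUntouched v.mem s.mem := hE _ _ (by omega)
  have hcode : Mem.EqOn Vorbis.L.textLo Vorbis.L.textHi u₀.mem s.mem := by
    have h1 : Mem.EqOn Vorbis.L.textLo Vorbis.L.textHi u₀.mem v.mem := hfr.code
    exact h1.trans (hE _ _ (by
      have e : Vorbis.L.textHi = 0x119d40 := rfl
      omega))
  apply hmalloc A.2 g.frames' A.1 s Vorbis.L.start_decoder.cut110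
  · -- `AtEntry`
    refine ⟨hm.rip, ?_, by decide, ?_, ?_, ?_, Vorbis.conv_code_in hcode, hm.inv⟩
    · rw [hm.ret]
      exact UInt64.ofNat_toNat
    · rw [hrsp]
      omega
    · simp only [conv_stackLo, vspec]
      rw [hrsp]
      omega
    · simp only [conv_stackHi]
      rw [hrsp]
      omega
  · -- the precondition
    have erdi : (s.reg .rdi).toNat = g.f := by
      rw [hm.rdi]
      exact toNat_addr _ (by omega)
    refine ⟨⟨?_, hfr.offText⟩, ?_, ?_, hcur.hand.arenaText⟩
    · have e : (s.reg .rsp).toNat + 8 = g.R := by omega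
      rw [e]
      exact hfr.shadow.untouched hun
    · rw [erdi]
      exact (hcur.hand.obj.mono (sub_frames g A)).blockLive
    · rw [erdi]
      apply hcur.sd.arena.transfer
      apply ObjEq.of_sameExcept hm.same
      · intro w hw
        simp only [ArenaFields.wins, List.mem_cons, List.mem_nil_iff, or_false] at hw
        subst hw
        simp only
        omega
      · intro w hw sp hsp
        simp only [ArenaFields.wins, List.mem_cons, List.mem_nil_iff, or_false] at hw
        subst hw
        have := hwin sp hsp
        simp only
        omega

/-! ### THE CUT ASSERTIONS of the conversion path (the three labels `cut110`, `cut111`, `cut112` of Vorbis/Labels.lean)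

Each is `InC5` with the changes the code in between makes; the ghost snapshots `A2 A3 Ai` stay. `E` = `c->entries`, `c` = `cb(i)`.
They are the interfaces of the lemmas `c5b_…`, `c5c_ok`, `c5d_…` below. -/

/-- **`cut110`, 0x1145e9: after `setup_malloc(f, c->entries)` returned** (line 3804, before `mov r12, rax`). `A` is the arena of
BEFORE the call. Success: the arena is `A.1.pushSetup E`, rax = the new block `p = B + S + 32`, allocated since `A.1` (hence since
`Ai`: `Since.older`); failure: the arena is unchanged, rax = 0 (the successor is ERRSTUB(3)). In both cases the book is still
sparse with its `lengths` in the temp block P1, `codeword_lengths = NULL`, `total` = the number of used entries. -/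
structure InC5m (u₀ : State) (g : Ghost) (i : Nat) (A2 A3 Ai : Arena) (A A' : Arena × List Obj) (lengths total : Nat)
    (v : State) : Prop where
  frame : Frame u₀ g Vorbis.L.start_decoder.cut110 A' v
  cur : Cur g i A2 A3 Ai A' v
  k1 : Codebook.K1 v.mem (g.cb v.mem i)
  rbx : v.reg .rbx = addr lengths
  rbp : v.reg .rbp = addr total
  /-- the arena of before the call is later than the head of the iteration -/
  exti : Ai.Extends A.1
  /-- the result of the allocator -/
  result :
    (A' = (A.1.pushSetup (Codebook.entries v.mem (g.cb v.mem i)).toNat,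
        A.1.newSetupObj (Codebook.entries v.mem (g.cb v.mem i)).toNat :: A.2) ∧
      v.reg .rax = addr (A.1.B + A.1.S + 32) ∧
      Since A.1 A'.1 ⟨A.1.B + (A.1.S + 32), (Codebook.entries v.mem (g.cb v.mem i)).toNat⟩) ∨
    (A' = A ∧ v.reg .rax = 0)
  sparse1 : Codebook.sparse v.mem (g.cb v.mem i) = 1
  lenL : LenL v.mem lengths (Codebook.entries v.mem (g.cb v.mem i)).toNat
  temps : TempsAre A'.1 [(lengths, (Codebook.entries v.mem (g.cb v.mem i)).toNat)]
  null : Codebook.codeword_lengths v.mem (g.cb v.mem i) = 0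
  total_eq : total = usedCount v.mem lengths (Codebook.entries v.mem (g.cb v.mem i)).toNat
  fresh : Fresh7 v.mem (g.cb v.mem i)

/-- **`cut111`, 0x11461d: after `memcpy(c->codeword_lengths, lengths, c->entries)` returned** (line 3806): the new block `p` is
stored in `codeword_lengths` and holds a copy of the temp block (`LenL.copy`, `counts_copy`); r12 = p, rbx = lengths;
P1 is still allocated. The program counter is a parameter: the assertion is used at `ret149` (0x114625, after the check of `c + 4`
that follows the return of memcpy). -/
structure InC5n (u₀ : State) (pc : Word) (g : Ghost) (i : Nat) (A2 A3 Ai : Arena) (A : Arena × List Obj) (lengths total : Nat)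
    (v : State) : Prop where
  frame : Frame u₀ g pc A v
  cur : Cur g i A2 A3 Ai A v
  k1 : Codebook.K1 v.mem (g.cb v.mem i)
  rbx : v.reg .rbx = addr lengths
  rbp : v.reg .rbp = addr total
  r12 : v.reg .r12 = addr (Codebook.codeword_lengths v.mem (g.cb v.mem i))
  block : Since Ai A.1 ⟨Codebook.codeword_lengths v.mem (g.cb v.mem i), (Codebook.entries v.mem (g.cb v.mem i)).toNat⟩
  copied : ∀ j, j < (Codebook.entries v.mem (g.cb v.mem i)).toNat →
    v.mem.u8 (Codebook.codeword_lengths v.mem (g.cb v.mem i) + j) = v.mem.u8 (lengths + j)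
  sparse1 : Codebook.sparse v.mem (g.cb v.mem i) = 1
  lenL : LenL v.mem lengths (Codebook.entries v.mem (g.cb v.mem i)).toNat
  temps : TempsAre A.1 [(lengths, (Codebook.entries v.mem (g.cb v.mem i)).toNat)]
  total_eq : total = usedCount v.mem lengths (Codebook.entries v.mem (g.cb v.mem i)).toNat
  fresh : Fresh7 v.mem (g.cb v.mem i)

/-- **`cut112`, 0x114636: after `setup_temp_free(f, lengths, c->entries)` returned** (line 3807): P1 is released (`temps = []`), the
array is the setup block `p = codeword_lengths` (allocated since `Ai`); the byte `sparse` is still 1 in memory (0x11464c stores the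
0); rbx still holds the dead pointer (0x11463f reloads it from `c->codeword_lengths`). -/
structure InC5o (u₀ : State) (g : Ghost) (i : Nat) (A2 A3 Ai : Arena) (A : Arena × List Obj) (total : Nat)
    (v : State) : Prop where
  frame : Frame u₀ g Vorbis.L.start_decoder.cut112 A v
  cur : Cur g i A2 A3 Ai A v
  k1 : Codebook.K1 v.mem (g.cb v.mem i)
  rbp : v.reg .rbp = addr total
  block : Since Ai A.1 ⟨Codebook.codeword_lengths v.mem (g.cb v.mem i), (Codebook.entries v.mem (g.cb v.mem i)).toNat⟩
  sparse1 : Codebook.sparse v.mem (g.cb v.mem i) = 1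
  lenL : LenL v.mem (Codebook.codeword_lengths v.mem (g.cb v.mem i)) (Codebook.entries v.mem (g.cb v.mem i)).toNat
  noTemps : A.1.temps = []
  total_le : (total : Int) ≤ Codebook.entries v.mem (g.cb v.mem i)
  fresh : Fresh7 v.mem (g.cb v.mem i)

/-- **`Env` of a cut point after an allocator call** (the ghost arena and the object list changed from `A` to `A'`): the shadow
layer and the arena layer of the callee's post give it back, together with the old `Env` (lawfulness and liveness of the objects
that are not arena blocks: `*f`, the input, the output, the globals), when the old objects are still objects (`hsub`; after a
`setup_temp_free` — `dropObjs` — that is false for the released temp block, and a different argument is needed: `hand_dropTemp` of Vorbis/Spec/StartDecoderCarry.lean, inside `Cur.free_call`). -/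
theorem env_grow {g : Ghost} {A A' : Arena × List Obj} {mem mem' : Mem} (henv : Env (g.Blk A) (g.Live A) mem)
    (hh : g.Hand A) (hB : A'.1.B = A.1.B) (hLn : A'.1.L = A.1.L) (hsub : ∀ o, o ∈ A.2 → o ∈ A'.2)
    (hsh : ShadowInv A'.2 g.frames' g.R mem') (ha : ArenaOK A'.1 A'.2 mem' g.f) :
    Env (g.Blk A') (g.Live A') mem' := by
  have hx : BlkOK (listBlk g.extra) :=
    ⟨fun B hB => henv.ok.inside B (runBlk_extra hB), fun B C hB hC => henv.ok.apart B C (runBlk_extra hB) (runBlk_extra hC)⟩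
  have hxl : BlkLive (listBlk g.extra) (g.Live A') := by
    intro B hB
    have hl := henv.live B (runBlk_extra hB)
    refine hl.mono (Live' := g.Live A') ?_
    intro x hx
    obtain ⟨o, ho, hb⟩ := hx
    refine ⟨o, ?_, hb⟩
    rcases List.mem_append.mp ho with hs | hoth
    · exact List.mem_append_left _ hs
    · exact List.mem_append_right _ (hsub o hoth)
  refine ⟨hsh.covers, ?_, ?_⟩
  · apply ha.runBlk_ok hx
    intro C hC
    rw [hB, hLn]
    rcases List.mem_cons.mp hC with rfl | hm
    · exact hh.objOut
    · exact hh.outside C hm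
  · exact ha.runBlk_live (fun o ho => List.mem_append_right _ ho) hxl

/-- **The windows a step of a codebook-loop segment may write without touching anything `Cur` reads** (besides the tables of the
book under construction and the struct `cb(i)`, which have their own lemmas): the stack below the steady stack pointer `R` (pushes,
callee frames); the statistics / allocator / error fields of `*f` — `[f+8, f+20)` (`setup_memory_required`,
`temp_memory_required`, `setup_temp_memory_required`), `[f+128, f+136)` (`setup_offset`, `temp_offset`: the arena layer is given
back by the allocator's post), `[f+140, f+144)` (`error`) —; the shadow region. -/
def QuietSpan (g : Ghost) (w : Span) : Prop :=
  (g.RA - 1888 ≤ w.lo ∧ w.hi ≤ g.R) ∨ (g.f + 8 ≤ w.lo ∧ w.hi ≤ g.f + 20) ∨ (g.f + 128 ≤ w.lo ∧ w.hi ≤ g.f + 136) ∨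
    (g.f + 140 ≤ w.lo ∧ w.hi ≤ g.f + 144) ∨ 0xC00000 ≤ w.lo

/-- **`Cur` over a batch of quiet stores and / or an allocator call**: the memory changed only inside `QuietSpan`s; the ghost arena
went from `A` to `A'` (`A' = A` allowed); the arena layer, the environment and the hand-over carrier for `A'` are given (the
allocator's post; `env_grow`; `HandOK.mono`). Generalises `cur_carry`. -/
theorem cur_move {u₀ : State} {g : Ghost} {pc : Word} {i : Nat} {A2 A3 Ai : Arena} {A A' : Arena × List Obj} {v w : State}
    (hfr : Frame u₀ g pc A v) (h : Cur g i A2 A3 Ai A v) {ws : List Span}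
    (hs : Mem.SameExcept ws v.mem w.mem) (hws : ∀ s, s ∈ ws → QuietSpan g s)
    (hext : A.1.Extends A'.1) (henv : Env (g.Blk A') (g.Live A') w.mem) (hh : g.Hand A')
    (ha : ArenaOK A'.1 A'.2 w.mem g.f) (hr : w.reg .r14 = v.reg .r14) :
    Cur g i A2 A3 Ai A' w := by
  obtain ⟨hra8, hralo, hrahi⟩ := hfr.ra
  obtain ⟨hR, hR8⟩ := hfr.r_eq
  simp only [depth, steady] at hralo hR
  have hfw := f_where hfr h
  have hfa := f_above hfr h.hand
  have hf64 : g.f + Off.sizeof.stb_vorbis ≤ 2 ^ 64 := by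
    simp only [voff]
    omega
  -- agreement off the windows: a range that meets none of the five kinds
  have hE : ∀ lo hi, (hi ≤ g.RA - 1888 ∨ g.R ≤ lo) → (hi ≤ g.f + 8 ∨ g.f + 20 ≤ lo) → (hi ≤ g.f + 128 ∨ g.f + 136 ≤ lo) →
      (hi ≤ g.f + 140 ∨ g.f + 144 ≤ lo) → hi ≤ 0xC00000 → Mem.EqOn lo hi v.mem w.mem := by
    intro lo hi h1 h2 h3 h4 h5
    apply hs.eqOn lo hi
    intro s hsm
    have hq := hws s hsm
    unfold QuietSpan at hq
    omega
  -- the windows of `*f` every group reads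
  have heq : ObjEq [(0, 8), (20, 128), (136, 140), (144, 1808)] v.mem g.f w.mem g.f := by
    apply ObjEq.of_eqOn
    · intro x hx
      simp only [List.mem_cons, List.mem_nil_iff, or_false] at hx
      rcases hx with rfl | rfl | rfl | rfl <;> simp only [] <;> omega
    · intro x hx
      simp only [List.mem_cons, List.mem_nil_iff, or_false] at hx
      rcases hx with rfl | rfl | rfl | rfl <;> simp only [] <;> apply hE <;> omega
  have hmono : ∀ B, g.Blk A B → g.Blk A' B := fun B hB => runBlk_mono hext (fun _ hx => hx) B hB
  -- the arena's blocks are kept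
  have hout := h.objOut
  have hkA : AllKept A.1.Blk v.mem w.mem := by
    apply AllKept.of_sameExcept h.sd.arena.blkOK hs
    intro B hB s hsm
    have hq := hws s hsm
    unfold QuietSpan at hq
    have hin := arena_inside h.sd.arena hB
    have hoff := h.sd.arena.blk_off_stack hB
    have hrng := h.sd.arena.block_off hB
    have hb1 := h.sd.arena.AR1
    simp only [voff] at hout
    omega
  have hkAi : AllKept Ai.Blk v.mem w.mem := fun B hB => hkA B (hB.mono h.ages.exti)
  have ecnt : stb_vorbis.codebook_count w.mem g.f = stb_vorbis.codebook_count v.mem g.f := by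
    simp only [vacc, voff]
    exact heq.i32 160 (by decide)
  have ecbs : stb_vorbis.codebooks w.mem g.f = stb_vorbis.codebooks v.mem g.f := by
    simp only [vacc, voff]
    exact heq.u64 168 (by decide)
  have ecb : g.cb w.mem i = g.cb v.mem i := by
    unfold Ghost.cb
    simp only [stb_vorbis.codebooks_at]
    rw [ecbs]
  have hsd : SDw g.len 3 A' (g.Blk A') (g.Live A') w.mem g.f g.R :=
    { env := henv
      frame := h.sd.frame.frame (hE _ _ (by omega) (by omega) (by omega) (by omega) (by omega)) (by omega)
      arena := ha
      setups := fun B hB => up g A' B hB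
      bits := (h.sd.bits.transfer (heq.sub (by decide)) ⟨h.sd.bits.OB1, h.sd.bits.OB1a⟩ h.sd.bits.OBR h.sd.bits.S2).reblk
        (hmono _ h.sd.bits.OB1) (hmono _ h.sd.bits.S2)
      first := by
        have e : stb_vorbis.first_decode w.mem g.f = stb_vorbis.first_decode v.mem g.f := by
          simp only [vacc, voff]
          exact heq.u8 1749 (by decide)
        rw [e]
        exact h.sd.first
      discard0 := by
        have e : stb_vorbis.discard_samples_deferred w.mem g.f = stb_vorbis.discard_samples_deferred v.mem g.f := by
          simp only [vacc, voff]
          exact heq.i32 1784 (by decide)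
        rw [e]
        exact h.sd.discard0
      header := fun hk => (h.sd.header hk).transfer (heq.sub (by decide))
      cb0 := fun hk => by
        refine ⟨(h.sd.cb0 hk).1.transfer (heq.sub (by decide)) (fun B _ hb => hmono B hb), ?_⟩
        rw [ecbs]
        exact (h.sd.cb0 hk).2
      rest := by
        have hrf : restFrom 3 = 176 := by decide
        apply ZeroRange.frame h.sd.rest
        · apply hE <;> simp only [hrf, voff] <;> omega
        · simp only [voff]
          omega }
  have hcbA : A.1.Blk (codebooksBlock v.mem g.f) := (h.ages.F2.1.mono h.ages.ext3).mono h.ages.exti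
  have hcb_rng := h.sd.arena.block_off hcbA
  have hcb_in := arena_inside h.sd.arena hcbA
  simp only [vblock, voff] at hcb_rng hcb_in
  have hcnt := h.ages.F1
  have hb1 := h.sd.arena.AR1
  simp only [voff] at hout
  refine
    { sd := hsd
      hand := hh
      ages := (h.ages.frame_old (heq.sub (by decide)) hkAi).grow hext
      zf := ?_
      lt := ?_
      slot_f := ?_
      slot_i := ?_
      r14 := ?_ }
  · rw [ecbs, ecnt]
    apply ZF.same h.zf
    · apply hE <;> simp only [voff] <;> omega
    · have := h.lt
      omega
    · simp only [voff]
      omega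
  · rw [ecnt]
    exact h.lt
  · rw [(hE (g.R + 0x18) (g.R + 0x20) (by omega) (by omega) (by omega) (by omega) (by omega)).u64 (g.R + 0x18) (by omega)
      (by omega) (by omega)]
    exact h.slot_f
  · rw [(hE (g.R + 0x30) (g.R + 0x34) (by omega) (by omega) (by omega) (by omega) (by omega)).u32 (g.R + 0x30) (by omega)
      (by omega) (by omega)]
    exact h.slot_i
  · rw [hr, ecb]
    exact h.r14

/-- **`Frame` over a batch of quiet stores and / or an allocator call**, at a new program counter and for a new ghost arena / object
list: the shadow layer for the new object list is given (the callee's post, or `ShadowInv.untouched`), and so are `offText` for the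
new objects and SH7 for `log2_4` (`hsh7`: FINDING — a store into `*f` keeps the table only if `*f` does not meet it, which the
assertions do not say; it follows from `ShadowOK.disjoint` for two different live objects). A shadow window must lie inside the
shadow of the arena (the function's footprint). Generalises `frame_carry`. -/
theorem frame_move {u₀ : State} {g : Ghost} {pc : Word} {A A' : Arena × List Obj} {v w : State}
    (hfr : Frame u₀ g pc A v) (hh : g.Hand A) (pc' : Word) {ws : List Span}
    (hs : Mem.SameExcept ws v.mem w.mem) (hws : ∀ s, s ∈ ws → QuietSpan g s)
    (hfoot : ∀ s, s ∈ ws → 0xC00000 ≤ s.lo →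
      (shadowSpan g.A0.1.B (g.A0.1.B + g.A0.1.L)).lo ≤ s.lo ∧ s.hi ≤ (shadowSpan g.A0.1.B (g.A0.1.B + g.A0.1.L)).hi)
    (hrip : w.rip = pc') (hrsp : w.reg .rsp = v.reg .rsp) (hinv : abiInv w)
    (hsh : ShadowInv A'.2 g.frames' g.R w.mem) (hoff : ∀ o, o ∈ A'.2 → Vorbis.L.textHi ≤ o.base)
    (hext : A.1.Extends A'.1) (hsh7 : Log2_4In w.mem) : Frame u₀ g pc' A' w := by
  obtain ⟨hra8, hralo, hrahi⟩ := hfr.ra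
  obtain ⟨hR, hR8⟩ := hfr.r_eq
  simp only [depth, steady] at hralo hR
  have hfa := f_above hfr hh
  have hE : ∀ lo hi, (hi ≤ g.RA - 1888 ∨ g.R ≤ lo) → (hi ≤ g.f + 8 ∨ g.f + 144 ≤ lo) → hi ≤ 0xC00000 →
      Mem.EqOn lo hi v.mem w.mem := by
    intro lo hi h1 h2 h5
    apply hs.eqOn lo hi
    intro s hsm
    have hq := hws s hsm
    unfold QuietSpan at hq
    omega
  have hup : Mem.EqOn g.R (g.R + 0x5d0) v.mem w.mem := hE _ _ (by omega) (by omega) (by omega)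
  refine
    { entry := hfr.entry
      rip := hrip
      rsp := by rw [hrsp]; exact hfr.rsp
      shadowIdx := by rw [hup.u64 _ (by omega) (by omega) (by omega)]; exact hfr.shadowIdx
      saved_rbx := by rw [hup.u64 _ (by omega) (by omega) (by omega)]; exact hfr.saved_rbx
      saved_rbp := by rw [hup.u64 _ (by omega) (by omega) (by omega)]; exact hfr.saved_rbp
      saved_r12 := by rw [hup.u64 _ (by omega) (by omega) (by omega)]; exact hfr.saved_r12
      saved_r13 := by rw [hup.u64 _ (by omega) (by omega) (by omega)]; exact hfr.saved_r13
      saved_r14 := by rw [hup.u64 _ (by omega) (by omega) (by omega)]; exact hfr.saved_r14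
      saved_r15 := by rw [hup.u64 _ (by omega) (by omega) (by omega)]; exact hfr.saved_r15
      saved_ra := by rw [hup.u64 _ (by omega) (by omega) (by omega)]; exact hfr.saved_ra
      code := ?_
      inv := hinv
      shadow := hsh
      offText := hoff
      ext := hfr.ext.trans hext
      callers := hfr.callers
      sh7 := hsh7
      same := ?_ }
  · show Mem.EqOn Vorbis.L.textLo Vorbis.L.textHi u₀.mem w.mem
    have h1 : Mem.EqOn Vorbis.L.textLo Vorbis.L.textHi u₀.mem v.mem := hfr.code
    have hfw := (hh.obj.mono (sub_frames g A)).where_ hfr.shadow hfr.offText (by simp only [voff]; omega)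
    exact h1.trans (hE _ _ (by
      have e : Vorbis.L.textHi = 0x119d40 := rfl
      omega) (by
      have e : Vorbis.L.textHi = 0x119d40 := rfl
      omega) (by
      have e : Vorbis.L.textHi = 0x119d40 := rfl
      omega))
  · apply hfr.same.trans
    apply hs.mono
    intro s hsm a h1 h2
    have hq := hws s hsm
    have hft := hfoot s hsm
    unfold QuietSpan at hq
    have hfw := (hh.obj.mono (sub_frames g A)).where_ hfr.shadow hfr.offText (by simp only [voff]; omega)
    simp only [voff] at hfw
    have inF : (g.f + 8 ≤ s.lo ∧ s.hi ≤ g.f + 144) →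
        ∃ w', w' ∈ footprint g ∧ w'.lo ≤ a ∧ a < w'.hi := by
      intro hin
      refine ⟨(objBlock (g.e.reg .rdi).toNat).span, ?_, ?_, ?_⟩
      · unfold footprint writes
        simp only [List.mem_cons, true_or, or_true]
      · show g.f ≤ a
        omega
      · show a < g.f + Off.sizeof.stb_vorbis
        simp only [voff]
        omega
    rcases hq with q1 | q2 | q3 | q4 | q5
    · refine ⟨⟨g.RA - depth, g.RA⟩, ?_, ?_, ?_⟩
      · unfold footprint
        exact List.mem_cons_self
      · simp only [depth]
        omega
      · simp only
        omega
    · exact inF (by omega)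
    · exact inF (by omega)
    · exact inF (by omega)
    · -- a shadow window: inside the arena's shadow
      refine ⟨shadowSpan g.A0.1.B (g.A0.1.B + g.A0.1.L), ?_, ?_, ?_⟩
      · unfold footprint writes
        simp only [List.mem_cons, true_or, or_true]
      · have := (hft q5).1
        omega
      · have := (hft q5).2
        omega

/-- **`*f` does not meet the global `log2_4`** (both are blocks of the function's block predicate: equal or disjoint). -/
theorem f_off_log2 {g : Ghost} {A : Arena × List Obj} {Live : Nat → Prop} {mem : Mem} (henv : Env (g.Blk A) Live mem) :
    g.f + 1808 ≤ 0x120640 ∨ 0x120650 ≤ g.f := by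
  have h1 : g.Blk A (objBlock g.f) := runBlk_extra List.mem_cons_self
  have h2 : g.Blk A ⟨0x120640, 16⟩ := by
    apply runBlk_extra
    simp only [fixedBlocks, globalBlocks, List.mem_cons, List.mem_nil_iff, or_false, true_or, or_true]
  rcases henv.ok.apart _ _ h1 h2 with e | hd
  · exfalso
    have e2 := congrArg Block.size e
    simp only [vblock, voff] at e2
    omega
  · simp only [vblock, voff] at hd
    omega

/-- **SH7 for `log2_4` over a batch of quiet stores**: none of the windows meets the table. -/
theorem sh7_move {u₀ : State} {g : Ghost} {pc : Word} {A : Arena × List Obj} {v : State} {mem' : Mem}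
    (hfr : Frame u₀ g pc A v) (henv : Env (g.Blk A) (g.Live A) v.mem) {ws : List Span}
    (hs : Mem.SameExcept ws v.mem mem') (hws : ∀ s, s ∈ ws → QuietSpan g s) : Log2_4In mem' := by
  obtain ⟨hra8, hralo, hrahi⟩ := hfr.ra
  simp only [depth] at hralo
  have hfl := f_off_log2 henv
  have hE : Mem.EqOn 0x120640 0x120650 v.mem mem' := by
    apply hs.eqOn
    intro s hsm
    have hq := hws s hsm
    unfold QuietSpan at hq
    omega
  intro k hk
  have hb : Vorbis.Globals.log2_4.beg = 0x120640 := rfl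
  have e : (UInt64.ofNat (Vorbis.Globals.log2_4.beg + k)).toNat = 0x120640 + k := by
    rw [hb]
    exact toNat_addr _ (by omega)
  rw [hE.readLE _ 1 (by omega) (by omega) (by omega)]
  exact hfr.sh7 k hk

/-- Two footprints in sequence: the union of the window lists. -/
theorem sameExcept_append {ws1 ws2 : List Span} {m1 m2 m3 : Mem} (h1 : Mem.SameExcept ws1 m1 m2)
    (h2 : Mem.SameExcept ws2 m2 m3) : Mem.SameExcept (ws1 ++ ws2) m1 m3 := by
  apply Mem.SameExcept.trans (ν := m2)
  · apply h1.mono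
    intro w hw a ha1 ha2
    exact ⟨w, List.mem_append_left _ hw, ha1, ha2⟩
  · apply h2.mono
    intro w hw a ha1 ha2
    exact ⟨w, List.mem_append_right _ hw, ha1, ha2⟩

/-- **The struct `cb(i)` and the `lengths` array over a batch of quiet stores** (generalises `book_carry`). -/
theorem book_move {u₀ : State} {g : Ghost} {pc : Word} {i : Nat} {A2 A3 Ai : Arena} {A : Arena × List Obj} {v : State} {mem' : Mem}
    {lengths : Nat} (hfr : Frame u₀ g pc A v) (h : Cur g i A2 A3 Ai A v)
    (hp : LengthsAt (Since Ai A.1) A v.mem (g.cb v.mem i) lengths) {ws : List Span}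
    (hs : Mem.SameExcept ws v.mem mem') (hws : ∀ s, s ∈ ws → QuietSpan g s) :
    g.cb mem' i = g.cb v.mem i ∧ Codebook.SameFields v.mem mem' (g.cb v.mem i) ∧
      Mem.EqOn lengths (lengths + (Codebook.entries v.mem (g.cb v.mem i)).toNat) v.mem mem' := by
  obtain ⟨hra8, hralo, hrahi⟩ := hfr.ra
  obtain ⟨hR, hR8⟩ := hfr.r_eq
  simp only [depth, steady] at hralo hR
  have hcw := cb_where h
  have hlw := lengths_where h hp
  have hout := h.objOut
  simp only [voff] at hout
  have hb1 := h.sd.arena.AR1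
  -- the struct lies in the codebooks block, inside the arena
  have hcbok : CodebooksOK (g.Blk A) v.mem g.f := ((h.sd.cb0 (by omega)).1).ok (h.sd.cb0 (by omega)).2
  have hcbA : A.1.Blk (codebooksBlock v.mem g.f) := (h.ages.F2.1.mono h.ages.ext3).mono h.ages.exti
  have hcb_in := hcbok.cb_in i h.lt
  have hcbar := arena_inside h.sd.arena hcbA
  have hcin : A.1.B ≤ g.cb v.mem i ∧ g.cb v.mem i + 2120 ≤ A.1.B + A.1.L := by
    unfold Ghost.cb
    simp only [vblock, voff] at hcb_in hcbar ⊢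
    omega
  -- the array lies in a block of the arena (setup or temp)
  have hlin : A.1.B ≤ lengths ∧ lengths + (Codebook.entries v.mem (g.cb v.mem i)).toNat ≤ A.1.B + A.1.L := by
    rcases hp.sparse_01 with h0 | h1
    · have hb := (hp.dense_block h0).1
      have hr := arena_inside h.sd.arena hb
      simp only [vblock] at hr
      exact hr
    · have ht := (hp.sparse_temp h1).tblock (p := lengths) (n := (Codebook.entries v.mem (g.cb v.mem i)).toNat)
        List.mem_cons_self
      have hr := h.sd.arena.tblock_range ht
      have h2 := h.sd.arena.AR2
      have := le_r8 (Codebook.entries v.mem (g.cb v.mem i)).toNat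
      omega
  have hfw := f_where hfr h
  refine ⟨?_, ?_, ?_⟩
  · have hE : Mem.EqOn (g.f + 168) (g.f + 176) v.mem mem' := by
      apply hs.eqOn
      intro s hsm
      have hq := hws s hsm
      have hfa := f_above hfr h.hand
      unfold QuietSpan at hq
      omega
    have ecbs : stb_vorbis.codebooks mem' g.f = stb_vorbis.codebooks v.mem g.f := by
      simp only [vacc, voff]
      exact hE.u64 (g.f + 168) (by omega) (by omega) (by omega)
    unfold Ghost.cb
    simp only [stb_vorbis.codebooks_at]
    rw [ecbs]
  · apply Codebook.SameFields.of_same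
    · simp only [voff]
      omega
    · apply Block.Same.of_sameExcept hs
      intro s hsm
      have hq := hws s hsm
      unfold QuietSpan at hq
      simp only [voff]
      omega
  · apply hs.eqOn
    intro s hsm
    have hq := hws s hsm
    unfold QuietSpan at hq
    omega

/-- **The cut assertion `InC5m` at `cut110` holds when `setup_malloc` has returned**: non-vacuity of the cut, and
the pattern "`Cur` / `Frame` after an allocator call" (`cur_move`, `frame_move`, `env_grow`, `HandOK.mono`). -/
theorem after_malloc {u₀ : State} {g : Ghost} {i : Nat} {A2 A3 Ai : Arena} {A : Arena × List Obj} {lengths total : Nat}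
    {v s t : State} (hin : InC5 u₀ g i A2 A3 Ai A lengths total v) (hm : AtMalloc g i total v s)
    (hret : Returned (Vorbis.conv u₀) (Vorbis.Spec.setup_malloc.spec A.2 g.frames' A.1) s Vorbis.L.start_decoder.cut110 t) :
    ∃ A', InC5m u₀ g i A2 A3 Ai A A' lengths total t := by
  have hfr := hin.frame
  have hcur := hin.cur
  obtain ⟨hra8, hralo, hrahi⟩ := hfr.ra
  obtain ⟨hR, hR8⟩ := hfr.r_eq
  simp only [depth, steady] at hralo hR
  have hfw := f_where hfr hcur
  -- the state at the callee's entry, as numbers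
  have hrsp : (s.reg .rsp).toNat = g.R - 8 := by
    have h1 := hm.rsp
    rw [hfr.rsp] at h1
    have h3 := toNat_addr g.R (by omega)
    generalize addr g.R = r at h1 h3
    generalize s.reg .rsp = x at h1 ⊢
    u_omega
  have hrdi : (s.reg .rdi).toNat = g.f := by
    rw [hm.rdi]
    exact toNat_addr _ (by omega)
  have hE0 := hin.k1.ent_nonneg
  have hE1 := hin.k1.ent_lt
  obtain ⟨E, hE⟩ : ∃ E : Nat, Codebook.entries v.mem (g.cb v.mem i) = (E : Int) :=
    ⟨(Codebook.entries v.mem (g.cb v.mem i)).toNat, (Int.toNat_of_nonneg hE0).symm⟩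
  have hrsi : (s.reg .rsi).toNat % 2 ^ 32 = E := by
    rw [hm.rsi, hE]
    simp only [Int.toNat_natCast]
    rw [toNat_addr _ (by omega)]
    omega
  -- the callee's footprint, and the whole change since the segment's entry
  have hst := hret.same
  simp only [X86.User.Spec.footprint, vspec, hrsp, hrdi, hrsi] at hst
  have hvt := sameExcept_append hm.same hst
  -- the temp block of `lengths` bounds the request (so the shadow window lies inside the arena's shadow, fitting or not)
  have hsp1 := hm.sparse1
  have htb := (hin.place.sparse_temp hsp1).tblock (p := lengths) (n := (Codebook.entries v.mem (g.cb v.mem i)).toNat)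
    List.mem_cons_self
  have htr := hcur.sd.arena.tblock_range htb
  rw [hE] at htr
  simp only [Int.toNat_natCast] at htr
  have har2 := hcur.sd.arena.AR2
  have har1 := hcur.sd.arena.AR1
  have hler := le_r8 E
  have hB0 := hfr.ext.B
  have hL0 := hfr.ext.L
  have hws : ∀ w, w ∈ [(⟨g.RA - 1888, g.R⟩ : Span), ⟨g.f + 16, g.f + 20⟩] ++
      [⟨g.R - 8 - 80, g.R - 8⟩, ⟨g.f + 8, g.f + 12⟩, ⟨g.f + 128, g.f + 132⟩,
        shadowSpan (A.1.B + A.1.S + 32) (A.1.B + A.1.S + 32 + E)] → QuietSpan g w := by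
    intro w hw
    simp only [List.cons_append, List.nil_append, List.mem_cons, List.mem_nil_iff, or_false] at hw
    unfold QuietSpan
    rcases hw with rfl | rfl | rfl | rfl | rfl | rfl
    · left
      exact ⟨Nat.le_refl _, Nat.le_refl _⟩
    · right
      left
      simp only
      omega
    · left
      simp only
      omega
    · right
      left
      simp only
      omega
    · right
      right
      left
      simp only
      omega
    · right
      right
      right
      right
      unfold shadowSpan
      simp only
      omega
  have hfoot : ∀ w, w ∈ [(⟨g.RA - 1888, g.R⟩ : Span), ⟨g.f + 16, g.f + 20⟩] ++
      [⟨g.R - 8 - 80, g.R - 8⟩, ⟨g.f + 8, g.f + 12⟩, ⟨g.f + 128, g.f + 132⟩,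
        shadowSpan (A.1.B + A.1.S + 32) (A.1.B + A.1.S + 32 + E)] → 0xC00000 ≤ w.lo →
      (shadowSpan g.A0.1.B (g.A0.1.B + g.A0.1.L)).lo ≤ w.lo ∧ w.hi ≤ (shadowSpan g.A0.1.B (g.A0.1.B + g.A0.1.L)).hi := by
    intro w hw hlo
    simp only [List.cons_append, List.nil_append, List.mem_cons, List.mem_nil_iff, or_false] at hw
    rw [← hB0, ← hL0]
    unfold shadowSpan at *
    rcases hw with rfl | rfl | rfl | rfl | rfl | rfl <;> simp only at hlo ⊢ <;> omega
  -- the registers after the return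
  have trsp : t.reg .rsp = v.reg .rsp := by
    rw [hret.rsp, hm.rsp]
    generalize v.reg .rsp = x
    u_omega
  have tr14 : t.reg .r14 = v.reg .r14 := (hret.saved.get .r14 rfl).trans hm.r14
  have trbx : t.reg .rbx = v.reg .rbx := (hret.saved.get .rbx rfl).trans hm.rbx
  have trbp : t.reg .rbp = v.reg .rbp := (hret.saved.get .rbp rfl).trans hm.rbp
  have tinv : abiInv t := hret.inv
  -- the book and the array read the same
  obtain ⟨ecb, sf, hEq⟩ := book_move hfr hcur hin.place hvt hws
  have hlw := lengths_where hcur hin.place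
  have hcnt := counts_same hEq (by omega)
  have hsh7 := sh7_move hfr hcur.sd.env hvt hws
  have hpost := hret.post
  simp only [setup_malloc.spec, hrsp, hrdi, hrsi] at hpost
  have hRtop : g.R - 8 + 8 = g.R := by omega
  rw [hRtop] at hpost
  -- what both cases share: the clauses about the book, for the arena `A'` of the case
  have build : ∀ A' : Arena × List Obj, Frame u₀ g Vorbis.L.start_decoder.cut110 A' t → Cur g i A2 A3 Ai A' t →
      A'.1.temps = A.1.temps → A'.1.B = A.1.B →
      ((A' = (A.1.pushSetup (Codebook.entries t.mem (g.cb t.mem i)).toNat,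
          A.1.newSetupObj (Codebook.entries t.mem (g.cb t.mem i)).toNat :: A.2) ∧
        t.reg .rax = addr (A.1.B + A.1.S + 32) ∧
        Since A.1 A'.1 ⟨A.1.B + (A.1.S + 32), (Codebook.entries t.mem (g.cb t.mem i)).toNat⟩) ∨
      (A' = A ∧ t.reg .rax = 0)) → InC5m u₀ g i A2 A3 Ai A A' lengths total t := by
    intro A' hf' hc' htemps hB' hres
    refine
      { frame := hf'
        cur := hc'
        k1 := by rw [ecb]; exact hin.k1.frame sf
        rbx := by rw [trbx]; exact hin.rbx
        rbp := by rw [trbp]; exact hin.rbp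
        exti := hcur.ages.exti
        result := hres
        sparse1 := by rw [ecb, sf.sparse]; exact hsp1
        lenL := by rw [ecb, sf.entries]; exact hin.lenL.same hEq (by omega)
        temps := ?_
        null := by rw [ecb, sf.codeword_lengths]; exact hin.place.sparse_null hsp1
        total_eq := by rw [ecb, sf.entries, hcnt.1]; exact hin.sparse_total hsp1
        fresh := ?_ }
    · rw [ecb, sf.entries]
      have h0 := hin.place.sparse_temp hsp1
      unfold TempsAre at h0 ⊢
      rw [htemps, hB']
      exact h0
    · rw [ecb]
      exact
        { lookup_type := by rw [sf.lookup_type]; exact hin.fresh.lookup_type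
          lookup_values := by rw [sf.lookup_values]; exact hin.fresh.lookup_values
          multiplicands := by rw [sf.multiplicands]; exact hin.fresh.multiplicands
          sorted_codewords := by rw [sf.sorted_codewords]; exact hin.fresh.sorted_codewords
          sorted_values := by rw [sf.sorted_values]; exact hin.fresh.sorted_values
          codewords := by rw [sf.codewords]; exact hin.fresh.codewords
          sorted_entries := by rw [sf.sorted_entries]; exact hin.fresh.sorted_entries }
  have eE : (Codebook.entries t.mem (g.cb t.mem i)).toNat = E := by
    rw [ecb, sf.entries, hE]
    simp only [Int.toNat_natCast]
  by_cases hfit : A.1.Fits E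
  · -- the allocation succeeded: the arena grew, one more live object
    obtain ⟨hrax, ha', hsh'⟩ := hpost.1 hfit
    have hext : A.1.Extends (A.1.pushSetup E) := A.1.extends_pushSetup E
    have hh' : g.Hand (A.1.pushSetup E, A.1.newSetupObj E :: A.2) :=
      HandOK.mono hcur.hand hext (fun o ho => List.mem_cons_of_mem _ ho)
    have henv' : Env (g.Blk (A.1.pushSetup E, A.1.newSetupObj E :: A.2)) (g.Live (A.1.pushSetup E, A.1.newSetupObj E :: A.2))
        t.mem :=
      env_grow hcur.sd.env hcur.hand rfl rfl (fun o ho => List.mem_cons_of_mem _ ho) hsh' ha'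
    have hoff' : ∀ o, o ∈ A.1.newSetupObj E :: A.2 → Vorbis.L.textHi ≤ o.base := by
      intro o ho
      rcases List.mem_cons.mp ho with rfl | hm'
      · have := hcur.hand.arenaText
        unfold Arena.newSetupObj Arena.setupObj
        simp only
        omega
      · exact hfr.offText o hm'
    refine ⟨(A.1.pushSetup E, A.1.newSetupObj E :: A.2), ?_⟩
    apply build
    · exact frame_move hfr hcur.hand Vorbis.L.start_decoder.cut110 hvt hws hfoot hret.rip trsp tinv hsh' hoff' hext hsh7
    · exact cur_move hfr hcur hvt hws hext henv' hh' ha' tr14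
    · rfl
    · rfl
    · left
      rw [eE]
      refine ⟨rfl, ?_, hcur.sd.arena.since_pushSetup E⟩
      exact eq_addr _ _ hrax
  · -- the allocation failed: nothing changed but the statistics field
    obtain ⟨hrax, ha', hun'⟩ := hpost.2 hfit
    have hun_vs : ShadowUntouched v.mem s.mem := by
      apply hm.same.eqOn
      intro w hw
      simp only [List.mem_cons, List.mem_nil_iff, or_false] at hw
      rcases hw with rfl | rfl <;> simp only <;> omega
    have hun : ShadowUntouched v.mem t.mem := Mem.EqOn.trans hun_vs hun'.1
    refine ⟨A, ?_⟩
    apply build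
    · exact frame_move hfr hcur.hand Vorbis.L.start_decoder.cut110 hvt hws hfoot hret.rip trsp tinv
        (hfr.shadow.untouched hun) hfr.offText (Arena.Extends.refl _) hsh7
    · exact cur_move hfr hcur hvt hws (Arena.Extends.refl _) (hcur.sd.env.eqOn hun) hcur.hand ha' tr14
    · rfl
    · rfl
    · right
      exact ⟨rfl, hrax⟩

/-- **PART `C5a` (entry … `cut110`)**: from the entry assertion `InC5` (0x114594) the machine reaches `AtC6` (0x114668; the
book stays sparse, or a dense book through the counting loop 3818), or `cut110` (0x1145e9: `setup_malloc` of the conversion has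
returned) with the assertion `InC5m`. `entry_ok`, then `malloc_ret`, then `after_malloc`. -/
theorem c5a_ok {Lay : Layout} (hLay : Lay.hi = 0x1000000) {μ : Microarch} (hμ : UserX.MicroOK μ) {u₀ : State}
    (hcode : HasCodeNat Lay u₀ Vorbis.L.start_decoder.entry Vorbis.Code.code_start_decoder.nat Vorbis.L.start_decoder.size)
    (hload1 : Asan.SmallCheck Lay μ Vorbis.WayInv (Vorbis.CodeOK u₀) [.rax, .rdx] 1 Vorbis.L.__asan_load1_noabort.entry)
    (hload4 : Asan.SmallCheck Lay μ Vorbis.WayInv (Vorbis.CodeOK u₀) [.rax, .rcx, .rdx] 4 Vorbis.L.__asan_load4_noabort.entry)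
    (hmalloc : ∀ (others : List Obj) (frames : List (Nat × FrameLayout)) (A : Arena),
      Calls Lay μ Vorbis.WayInv (Vorbis.conv u₀) Vorbis.L.setup_malloc.entry (Vorbis.Spec.setup_malloc.spec others frames A))
    {g : Ghost} {i : Nat} {A2 A3 Ai : Arena} {A : Arena × List Obj} {lengths total : Nat} {v : State}
    (hin : InC5 u₀ g i A2 A3 Ai A lengths total v) :
    ReachVia Lay μ Vorbis.WayInv v
      (fun w => (AtC6 u₀ g i w ∨ AtERR u₀ g w) ∨ ∃ A', InC5m u₀ g i A2 A3 Ai A A' lengths total w) := by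
  refine (entry_ok hLay hμ hcode hload1 hload4 hin).trans ?_
  intro s hs
  rcases hs with hdone | hm
  · exact ReachVia.done (Or.inl hdone)
  · refine (malloc_ret hmalloc hin hm).trans ?_
    intro t hret
    exact ReachVia.done (Or.inr (after_malloc hin hm hret))

/-- **`Cur` over a field store into the struct `cb(i)` of the book under construction** (`c->codeword_lengths = …`, `c->sparse = 0`,
every field store of the iteration): `Cur` constrains no field of the book itself, the struct lies in the codebooks block — off
`*f`, off the stack, off the shadow —, the record is kept by `Cur.store_book`, the later books stay zero. -/
theorem cur_store_book {u₀ : State} {g : Ghost} {pc : Word} {i : Nat} {A2 A3 Ai : Arena} {A : Arena × List Obj} {v w : State}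
    (hfr : Frame u₀ g pc A v) (h : Cur g i A2 A3 Ai A v) (off k x : Nat) (hoff : off + k ≤ 2120)
    (hw : w.mem = v.mem.writeLE (addr (g.cb v.mem i + off)) k x) (hr : w.reg .r14 = v.reg .r14) :
    Cur g i A2 A3 Ai A w := by
  obtain ⟨hra8, hralo, hrahi⟩ := hfr.ra
  obtain ⟨hR, hR8⟩ := hfr.r_eq
  simp only [depth, steady] at hralo hR
  have hfw := f_where hfr h
  have hf64 : g.f + Off.sizeof.stb_vorbis ≤ 2 ^ 64 := by
    simp only [voff]
    omega
  have hcw := cb_where h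
  have hout := h.objOut
  simp only [voff] at hout
  have hb1 := h.sd.arena.AR1
  have hcbok : CodebooksOK (g.Blk A) v.mem g.f := ((h.sd.cb0 (by omega)).1).ok (h.sd.cb0 (by omega)).2
  have hcbA : A.1.Blk (codebooksBlock v.mem g.f) := (h.ages.F2.1.mono h.ages.ext3).mono h.ages.exti
  have hcb_in := hcbok.cb_in i h.lt
  have hcbar := arena_inside h.sd.arena hcbA
  have hcin : A.1.B ≤ g.cb v.mem i ∧ g.cb v.mem i + 2120 ≤ A.1.B + A.1.L := by
    unfold Ghost.cb
    simp only [vblock, voff] at hcb_in hcbar ⊢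
    omega
  have hn := toNat_addr (g.cb v.mem i + off) (by omega)
  -- the store as a footprint of one window inside the struct
  have hs : Mem.SameExcept [⟨g.cb v.mem i + off, g.cb v.mem i + off + k⟩] v.mem w.mem := by
    rw [hw]
    apply Mem.SameExcept.writeLE
    · rw [hn]
      omega
    · refine ⟨_, List.mem_singleton.mpr rfl, ?_, ?_⟩
      · simp only
        omega
      · simp only
        omega
  have hE : ∀ lo hi, (hi ≤ g.cb v.mem i ∨ g.cb v.mem i + 2120 ≤ lo) → Mem.EqOn lo hi v.mem w.mem := by
    intro lo hi hd
    apply hs.eqOn lo hi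
    intro s hsm
    have e : s = ⟨g.cb v.mem i + off, g.cb v.mem i + off + k⟩ := List.mem_singleton.mp hsm
    subst e
    simp only
    omega
  have heq : ObjEq [(0, 1808)] v.mem g.f w.mem g.f := by
    apply ObjEq.of_eqOn
    · intro x hx
      have e : x = (0, 1808) := List.mem_singleton.mp hx
      subst e
      simp only
      omega
    · intro x hx
      have e : x = (0, 1808) := List.mem_singleton.mp hx
      subst e
      apply hE
      simp only
      omega
  have hos : ObjSame g.f v.mem w.mem := heq.sub (by decide)
  have ecnt : stb_vorbis.codebook_count w.mem g.f = stb_vorbis.codebook_count v.mem g.f := by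
    simp only [vacc, voff]
    exact heq.i32 160 (by decide)
  have ecbs : stb_vorbis.codebooks w.mem g.f = stb_vorbis.codebooks v.mem g.f := by
    simp only [vacc, voff]
    exact heq.u64 168 (by decide)
  have ecb : g.cb w.mem i = g.cb v.mem i := by
    unfold Ghost.cb
    simp only [stb_vorbis.codebooks_at]
    rw [ecbs]
  have hsd : SDw g.len 3 A (g.Blk A) (g.Live A) w.mem g.f g.R :=
    { env := h.sd.env.eqOn (hE _ _ (by omega))
      frame := h.sd.frame.frame (hE _ _ (by omega)) (by omega)
      arena := h.sd.arena.transfer (heq.sub (by decide))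
      setups := h.sd.setups
      bits := h.sd.bits.frame hos
      first := by
        have e : stb_vorbis.first_decode w.mem g.f = stb_vorbis.first_decode v.mem g.f := by
          simp only [vacc, voff]
          exact heq.u8 1749 (by decide)
        rw [e]
        exact h.sd.first
      discard0 := by
        have e : stb_vorbis.discard_samples_deferred w.mem g.f = stb_vorbis.discard_samples_deferred v.mem g.f := by
          simp only [vacc, voff]
          exact heq.i32 1784 (by decide)
        rw [e]
        exact h.sd.discard0
      header := fun hk => (h.sd.header hk).transfer (heq.sub (by decide))
      cb0 := fun hk => by
        refine ⟨(h.sd.cb0 hk).1.transfer (heq.sub (by decide)) (fun _ _ hb => hb), ?_⟩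
        rw [ecbs]
        exact (h.sd.cb0 hk).2
      rest := by
        have hrf : restFrom 3 = 176 := by decide
        apply ZeroRange.frame h.sd.rest
        · apply hE
          simp only [hrf, voff]
          omega
        · simp only [voff]
          omega }
  have hcb_rng := h.sd.arena.block_off hcbA
  simp only [vblock, voff] at hcb_rng
  have hcnt := h.ages.F1
  have hages := h.store_book hf64 (b := g.cb v.mem i + off) (k := k) x (by
    simp only [vblock, voff]
    omega)
  rw [← hw] at hages
  refine
    { sd := hsd
      hand := h.hand
      ages := hages
      zf := ?_
      lt := ?_
      slot_f := ?_
      slot_i := ?_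
      r14 := ?_ }
  · rw [ecbs, ecnt]
    apply ZF.same h.zf
    · apply hE
      right
      unfold Ghost.cb
      simp only [stb_vorbis.codebooks_at, voff]
      omega
    · have := h.lt
      omega
    · simp only [voff]
      omega
  · rw [ecnt]
    exact h.lt
  · rw [(hE (g.R + 0x18) (g.R + 0x20) (by omega)).u64 (g.R + 0x18) (by omega) (by omega) (by omega)]
    exact h.slot_f
  · rw [(hE (g.R + 0x30) (g.R + 0x34) (by omega)).u32 (g.R + 0x30) (by omega) (by omega) (by omega)]
    exact h.slot_i
  · rw [hr, ecb]
    exact h.r14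

/-- **`Frame` over a field store into the struct `cb(i)`**: the struct lies in the arena (the function's footprint), above the text,
off the stack, off the shadow, off the global `log2_4`. -/
theorem frame_store_book {u₀ : State} {g : Ghost} {pc : Word} {i : Nat} {A2 A3 Ai : Arena} {A : Arena × List Obj} {v w : State}
    (hfr : Frame u₀ g pc A v) (h : Cur g i A2 A3 Ai A v) (pc' : Word) (off k x : Nat) (hoff : off + k ≤ 2120)
    (hw : w.mem = v.mem.writeLE (addr (g.cb v.mem i + off)) k x) (hrip : w.rip = pc') (hrsp : w.reg .rsp = v.reg .rsp)
    (hinv : abiInv w) : Frame u₀ g pc' A w := by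
  obtain ⟨hra8, hralo, hrahi⟩ := hfr.ra
  obtain ⟨hR, hR8⟩ := hfr.r_eq
  simp only [depth, steady] at hralo hR
  have hcw := cb_where h
  have hb1 := h.sd.arena.AR1
  have htext := h.hand.arenaText
  have hcbok : CodebooksOK (g.Blk A) v.mem g.f := ((h.sd.cb0 (by omega)).1).ok (h.sd.cb0 (by omega)).2
  have hcbA : A.1.Blk (codebooksBlock v.mem g.f) := (h.ages.F2.1.mono h.ages.ext3).mono h.ages.exti
  have hcb_in := hcbok.cb_in i h.lt
  have hcbar := arena_inside h.sd.arena hcbA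
  have hcin : A.1.B ≤ g.cb v.mem i ∧ g.cb v.mem i + 2120 ≤ A.1.B + A.1.L := by
    unfold Ghost.cb
    simp only [vblock, voff] at hcb_in hcbar ⊢
    omega
  -- the arena does not meet the global `log2_4` (a fixed object)
  have hlog : (0x120640 : Nat) + 16 ≤ A.1.B ∨ A.1.B + A.1.L ≤ 0x120640 := by
    have := h.hand.outside ⟨0x120640, 16⟩ (by
      simp only [fixedBlocks, globalBlocks, List.mem_cons, List.mem_nil_iff, or_false, true_or, or_true])
    simp only at this
    omega
  have hn := toNat_addr (g.cb v.mem i + off) (by omega)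
  have hs : Mem.SameExcept [⟨g.cb v.mem i + off, g.cb v.mem i + off + k⟩] v.mem w.mem := by
    rw [hw]
    apply Mem.SameExcept.writeLE
    · rw [hn]
      omega
    · refine ⟨_, List.mem_singleton.mpr rfl, ?_, ?_⟩
      · simp only
        omega
      · simp only
        omega
  have hE : ∀ lo hi, (hi ≤ g.cb v.mem i ∨ g.cb v.mem i + 2120 ≤ lo) → Mem.EqOn lo hi v.mem w.mem := by
    intro lo hi hd
    apply hs.eqOn lo hi
    intro s hsm
    have e : s = ⟨g.cb v.mem i + off, g.cb v.mem i + off + k⟩ := List.mem_singleton.mp hsm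
    subst e
    simp only
    omega
  have hup : Mem.EqOn g.R (g.R + 0x5d0) v.mem w.mem := hE _ _ (by omega)
  have hB0 := hfr.ext.B
  have hL0 := hfr.ext.L
  refine
    { entry := hfr.entry
      rip := hrip
      rsp := by rw [hrsp]; exact hfr.rsp
      shadowIdx := by rw [hup.u64 _ (by omega) (by omega) (by omega)]; exact hfr.shadowIdx
      saved_rbx := by rw [hup.u64 _ (by omega) (by omega) (by omega)]; exact hfr.saved_rbx
      saved_rbp := by rw [hup.u64 _ (by omega) (by omega) (by omega)]; exact hfr.saved_rbp
      saved_r12 := by rw [hup.u64 _ (by omega) (by omega) (by omega)]; exact hfr.saved_r12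
      saved_r13 := by rw [hup.u64 _ (by omega) (by omega) (by omega)]; exact hfr.saved_r13
      saved_r14 := by rw [hup.u64 _ (by omega) (by omega) (by omega)]; exact hfr.saved_r14
      saved_r15 := by rw [hup.u64 _ (by omega) (by omega) (by omega)]; exact hfr.saved_r15
      saved_ra := by rw [hup.u64 _ (by omega) (by omega) (by omega)]; exact hfr.saved_ra
      code := ?_
      inv := hinv
      shadow := hfr.shadow.untouched (hE _ _ (by omega))
      offText := hfr.offText
      ext := hfr.ext
      callers := hfr.callers
      sh7 := ?_
      same := ?_ }
  · show Mem.EqOn Vorbis.L.textLo Vorbis.L.textHi u₀.mem w.mem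
    have h1 : Mem.EqOn Vorbis.L.textLo Vorbis.L.textHi u₀.mem v.mem := hfr.code
    exact h1.trans (hE _ _ (by omega))
  · intro j hj
    have hb : Vorbis.Globals.log2_4.beg = 0x120640 := rfl
    have e : (UInt64.ofNat (Vorbis.Globals.log2_4.beg + j)).toNat = 0x120640 + j := by
      rw [hb]
      exact toNat_addr _ (by omega)
    rw [(hE 0x120640 0x120650 (by omega)).readLE _ 1 (by omega) (by omega) (by omega)]
    exact hfr.sh7 j hj
  · apply hfr.same.trans
    apply hs.mono
    intro s hsm a h1 h2
    have e : s = ⟨g.cb v.mem i + off, g.cb v.mem i + off + k⟩ := List.mem_singleton.mp hsm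
    subst e
    simp only at h1 h2
    refine ⟨⟨g.A0.1.B, g.A0.1.B + g.A0.1.L⟩, ?_, ?_, ?_⟩
    · unfold footprint writes
      simp only [List.mem_cons, true_or, or_true]
    · simp only
      omega
    · simp only
      omega

/-! ### The tail of the conversion: `cut110` … `AtC6` / `AtERR`, over the carry layer of Vorbis/Spec/StartDecoderCarry.lean -/

set_option maxRecDepth 100000

/-- **The fields of the struct at `c` that the conversion (lines 3804–3809) does NOT write are the same in two memories**: everything
but `codeword_lengths` (`[c + 8, c + 16)`) and `sparse` (`[c + 27, c + 28)`). Gives K1 and the freshness clauses back. -/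
structure RestFields (m m' : Mem) (c : Nat) : Prop where
  dimensions : Codebook.dimensions m' c = Codebook.dimensions m c
  entries : Codebook.entries m' c = Codebook.entries m c
  lookup_type : Codebook.lookup_type m' c = Codebook.lookup_type m c
  lookup_values : Codebook.lookup_values m' c = Codebook.lookup_values m c
  multiplicands : Codebook.multiplicands m' c = Codebook.multiplicands m c
  codewords : Codebook.codewords m' c = Codebook.codewords m c
  sorted_codewords : Codebook.sorted_codewords m' c = Codebook.sorted_codewords m c
  sorted_values : Codebook.sorted_values m' c = Codebook.sorted_values m c
  sorted_entries : Codebook.sorted_entries m' c = Codebook.sorted_entries m c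

/-- The fields from the three kept parts of the struct. -/
theorem RestFields.of_eqOn {m m' : Mem} {c : Nat} (hc : c + 2120 ≤ 2 ^ 64) (b1 : Mem.EqOn c (c + 8) m m')
    (b2 : Mem.EqOn (c + 16) (c + 27) m m') (b3 : Mem.EqOn (c + 28) (c + 2120) m m') : RestFields m m' c := by
  constructor
  · simp only [vacc, voff]
    exact b1.i32 _ (by omega) (by omega) (by omega)
  · simp only [vacc, voff]
    exact b1.i32 _ (by omega) (by omega) (by omega)
  · simp only [vacc, voff]
    exact b2.u8 _ (by omega) (by omega) (by omega)
  · simp only [vacc, voff]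
    exact b3.u32 _ (by omega) (by omega) (by omega)
  · simp only [vacc, voff]
    exact b3.u64 _ (by omega) (by omega) (by omega)
  · simp only [vacc, voff]
    exact b3.u64 _ (by omega) (by omega) (by omega)
  · simp only [vacc, voff]
    exact b3.u64 _ (by omega) (by omega) (by omega)
  · simp only [vacc, voff]
    exact b3.u64 _ (by omega) (by omega) (by omega)
  · simp only [vacc, voff]
    exact b3.i32 _ (by omega) (by omega) (by omega)

/-- K1 reads `dimensions` and `entries` only. -/
theorem RestFields.k1 {m m' : Mem} {c : Nat} (e : RestFields m m' c) (h : Codebook.K1 m c) : Codebook.K1 m' c := by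
  refine ⟨?_, ?_, ?_, ?_⟩
  · rw [e.dimensions]
    exact h.dim_pos
  · rw [e.dimensions]
    exact h.dim_le
  · rw [e.entries]
    exact h.ent_nonneg
  · rw [e.entries]
    exact h.ent_lt

/-- The seven fresh fields are among the kept ones. -/
theorem RestFields.fresh {m m' : Mem} {c : Nat} (e : RestFields m m' c) (h : Fresh7 m c) : Fresh7 m' c :=
  { lookup_type := by rw [e.lookup_type]; exact h.lookup_type
    lookup_values := by rw [e.lookup_values]; exact h.lookup_values
    multiplicands := by rw [e.multiplicands]; exact h.multiplicands
    sorted_codewords := by rw [e.sorted_codewords]; exact h.sorted_codewords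
    sorted_values := by rw [e.sorted_values]; exact h.sorted_values
    codewords := by rw [e.codewords]; exact h.codewords
    sorted_entries := by rw [e.sorted_entries]; exact h.sorted_entries }

/-- **Every field of the struct at `c` inside a kept block** (the codebooks block over an allocator call): the fields of
`RestFields`, `sparse` and `codeword_lengths`. -/
theorem fields_of_kept {m m' : Mem} {c : Nat} {B : Block} (hk : B.Kept m m') (h1 : B.base ≤ c)
    (h2 : c + 2120 ≤ B.base + B.size) :
    RestFields m m' c ∧ Codebook.sparse m' c = Codebook.sparse m c ∧
      Codebook.codeword_lengths m' c = Codebook.codeword_lengths m c := by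
  refine ⟨⟨?_, ?_, ?_, ?_, ?_, ?_, ?_, ?_, ?_⟩, ?_, ?_⟩
  · simp only [vacc, voff]
    exact hk.i32 _ (by omega) (by omega)
  · simp only [vacc, voff]
    exact hk.i32 _ (by omega) (by omega)
  · simp only [vacc, voff]
    exact hk.u8 _ (by omega) (by omega)
  · simp only [vacc, voff]
    exact hk.u32 _ (by omega) (by omega)
  · simp only [vacc, voff]
    exact hk.u64 _ (by omega) (by omega)
  · simp only [vacc, voff]
    exact hk.u64 _ (by omega) (by omega)
  · simp only [vacc, voff]
    exact hk.u64 _ (by omega) (by omega)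
  · simp only [vacc, voff]
    exact hk.u64 _ (by omega) (by omega)
  · simp only [vacc, voff]
    exact hk.i32 _ (by omega) (by omega)
  · simp only [vacc, voff]
    exact hk.u8 _ (by omega) (by omega)
  · simp only [vacc, voff]
    exact hk.u64 _ (by omega) (by omega)

/-- **`MInv` over a step of the conversion** (C lines 3804–3809): every window is in the stack below the steady rsp (a pushed
return address, a callee's frame), in the struct `cb(i)`, or in a block allocated since the head of the iteration (`Young`:
memcpy's destination); no shadow byte is written. `MInv.step` with `Bits` by `bits_kept`. -/
theorem minv_ok {g : Ghost} {i : Nat} {A2 A3 Ai : Arena} {A : Arena × List Obj} {c : Nat} {m m' : Mem} {ws : List Span}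
    (h : MInv g i A2 A3 Ai A m) (hp : Pos g A) (hc : g.cb m i = c) (hs : Mem.SameExcept ws m m')
    (hun : ShadowUntouched m m')
    (hok : ∀ w, w ∈ ws → (g.R - 408 ≤ w.lo ∧ w.hi ≤ g.R) ∨ (c ≤ w.lo ∧ w.hi ≤ c + 2120) ∨ Young Ai A w) :
    MInv g i A2 A3 Ai A m' ∧ g.cb m' i = c := by
  have hcw := h.c_where
  rw [hc] at hcw
  have hb : Bits (g.Blk A) g.len m' g.f := by
    apply bits_kept hp h.sd.bits hs
    intro w hw
    rcases hok w hw with k | k | k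
    · left
      omega
    · right
      left
      omega
    · right
      left
      exact ⟨k.1, k.2.1⟩
  apply h.step hp hc hs hun _ hb
  intro w hw
  rcases hok w hw with k | k | k
  · exact OkWin0.ok (Or.inl k)
  · exact OkWin0.ok (Or.inr (Or.inr (Or.inr (Or.inl k))))
  · exact Or.inr k

/-- **`cut112` (0x114636) → `AtC6`**: `lengths = c->codeword_lengths ; c->sparse = 0` (lines 3808–3809: the checks of `c + 8`
and `c + 1BH`, the byte store), then the dense path `if (c->sparse)` (check of `c + 1BH`, the byte read back is 0), `sorted_count = 0`
and the counting loop 3818 (`loop_ok`). The assertion `InC5p` is established AT the loop head (the state `s_114844` itself is the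
reference state of `Head`). -/
theorem c5d_ok {Lay : Layout} (hLay : Lay.hi = 0x1000000) {μ : Microarch} (hμ : UserX.MicroOK μ) {u₀ : State}
    (hcode : HasCodeNat Lay u₀ Vorbis.L.start_decoder.entry Vorbis.Code.code_start_decoder.nat Vorbis.L.start_decoder.size)
    (hload1 : Asan.SmallCheck Lay μ Vorbis.WayInv (Vorbis.CodeOK u₀) [.rax, .rdx] 1 Vorbis.L.__asan_load1_noabort.entry)
    (hload4 : Asan.SmallCheck Lay μ Vorbis.WayInv (Vorbis.CodeOK u₀) [.rax, .rcx, .rdx] 4 Vorbis.L.__asan_load4_noabort.entry)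
    (hload8 : Asan.SmallCheck Lay μ Vorbis.WayInv (Vorbis.CodeOK u₀) [.rax, .rcx, .rdx] 8 Vorbis.L.__asan_load8_noabort.entry)
    (hstore1 : Asan.SmallCheck Lay μ Vorbis.WayInv (Vorbis.CodeOK u₀) [.rax, .rdx] 1 Vorbis.L.__asan_store1_noabort.entry)
    {g : Ghost} {i : Nat} {A2 A3 Ai : Arena} {A : Arena × List Obj} {total : Nat} {v : State}
    (hin : InC5o u₀ g i A2 A3 Ai A total v) :
    ReachVia Lay μ Vorbis.WayInv v (fun w => AtC6 u₀ g i w ∨ AtERR u₀ g w) := by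
  have hfr := hin.frame
  have hcur := hin.cur
  have he := hfr.entry
  v_entry he
  clear he_rip he_eq he_df he_mx he_sse he_code he_inv
  have hRA : g.RA = (g.e.reg .rsp).toNat := rfl
  simp only [depth] at he_room he_stack
  have hpos : Pos g A := Pos.of hfr hcur
  have hm0 : MInv g i A2 A3 Ai A v.mem := MInv.of hfr hcur
  have hcw0 := hm0.c_where
  generalize hge : g.e = e at he_retAddr he_align he_room he_top he_stack hRA
  have w_rip := hfr.rip
  have hR : g.R + 1480 = g.RA := hpos.r_eq
  have c_rsp : v.reg .rsp = e.reg .rsp - 1480 := by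
    rw [hfr.rsp]
    unfold addr
    rw [hRA] at hR
    u_omega
  have c_r14 := hcur.r14
  have c_rbp := hin.rbp
  have w_eq : Mem.EqOn Vorbis.L.textLo Vorbis.L.textHi u₀.mem v.mem := hfr.code
  have hdf : v.flags .df = false := (show abiInv _ from hfr.inv).1
  have hmx : v.mxcsr &&& 0x1F80 = 0x1F80 := (show abiInv _ from hfr.inv).2
  have hsse := Vorbis.sseOK_of_abiInv hfr.inv
  obtain ⟨c, hc⟩ : ∃ c, g.cb v.mem i = c := ⟨_, rfl⟩
  rw [hc] at c_r14 hcw0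
  obtain ⟨E, hE⟩ : ∃ E : Nat, Codebook.entries v.mem c = (E : Int) :=
    ⟨(Codebook.entries v.mem c).toNat, (Int.toNat_of_nonneg (by rw [← hc]; exact hin.k1.ent_nonneg)).symm⟩
  obtain ⟨cl, hcl⟩ : ∃ cl, Codebook.codeword_lengths v.mem c = cl := ⟨_, rfl⟩
  have l_cl : v.mem.readLE (addr c + 8) 8 = cl := by
    rw [← hcl]
    simp only [vfield, vacc, voff]
  have l_z24 : v.mem.readLE (e.reg .rsp - 1444) 4 = 0 := by
    have ea : e.reg .rsp - 1444 = addr (g.R + 0x24) := by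
      unfold addr
      rw [hRA] at hR
      u_omega
    rw [ea]
    simp only [vfield]
    exact hcur.sd.frame.z24 (by omega) (by omega)
  obtain ⟨cw, hcw⟩ : ∃ cw : Word, addr c = cw := ⟨_, rfl⟩
  have hcwn : cw.toNat = c := by
    rw [← hcw]
    exact toNat_addr _ (by omega)
  rw [hcw] at c_r14 l_cl
  have hc_where : 0x119d40 ≤ cw.toNat ∧ cw.toNat + 2120 ≤ 0xC00000 ∧ (cw.toNat + 2120 ≤ 0x700000 ∨ 0x800000 ≤ cw.toNat) := by
    have htx : 0x119d40 ≤ A.1.B := hcur.hand.arenaText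
    rw [hcwn]
    omega
  have hL := hcur.sd.env.live
  have hcbok : CodebooksOK (g.Blk A) v.mem g.f := ((hcur.sd.cb0 (by omega)).1).ok (hcur.sd.cb0 (by omega)).2
  have hsite_c : ∀ off n, off + n ≤ 2120 → 1 ≤ n → Site (g.Live A) (c + off) n := by
    intro off n h1 h2
    rw [← hc]
    exact CodebooksOK.site_cb_field hL hcbok i hcur.lt off n (by simp only [voff]; omega) h2 rfl
  u_walk hcode [hμ.vendor] until [Vorbis.L.start_decoder.cut113, Vorbis.L.start_decoder.loop10, Vorbis.L.start_decoder.cut4] span [Vorbis.L.textLo, Vorbis.L.textHi] side (v_side)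
  case check_11463a =>
    have hun : ShadowUntouched v.mem s_11463a.mem := by v_untouched
    refine Vorbis.Spec.check_site hfr.shadow hun (hsite_c 8 8 (by omega) (by omega)) ?_
    u_omega
  case check_114647 =>
    have hun : ShadowUntouched v.mem s_114647.mem := by v_untouched
    refine Vorbis.Spec.check_site hfr.shadow hun (hsite_c 27 1 (by omega) (by omega)) ?_
    u_omega
  case check_114655 =>
    have hun : ShadowUntouched v.mem s_114655.mem := by v_untouched
    refine Vorbis.Spec.check_site hfr.shadow hun (hsite_c 27 1 (by omega) (by omega)) ?_
    u_omega
  case cont =>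
    -- 0x11484a, the head of the counting loop, reached with j = 0, sorted_count = 0 after `c->sparse = 0`
    have hRn : g.R = (e.reg .rsp).toNat - 1480 := by
      rw [hRA] at hR
      omega
    have hs : Mem.SameExcept [⟨g.R - 8, g.R⟩, ⟨c + 27, c + 28⟩] v.mem s_114844.mem := by
      rw [hRn, ← hcwn]
      u_same
    have hun : ShadowUntouched v.mem s_114844.mem := by v_untouched
    have l_sp : s_114844.mem.readLE (cw + 27) 1 = 0 := by
      rw [w_mem]
      u_read
    -- `Frame` and CUR(i) at the loop head
    have hok : ∀ x, x ∈ [(⟨g.R - 8, g.R⟩ : Span), ⟨c + 27, c + 28⟩] → OkWin g Ai A (g.cb v.mem i) x := by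
      intro x hx
      simp only [List.mem_cons, List.mem_nil_iff, or_false] at hx
      apply OkWin0.ok
      unfold OkWin0
      rw [hc]
      rcases hx with rfl | rfl
      · left
        simp only []
        omega
      · right
        right
        right
        left
        simp only []
        omega
    have hb : Bits (g.Blk A) g.len s_114844.mem g.f := by
      apply bits_kept hpos hcur.sd.bits hs
      intro x hx
      simp only [List.mem_cons, List.mem_nil_iff, or_false] at hx
      rcases hx with rfl | rfl
      · left
        simp only []
        omega
      · right
        left
        simp only []
        omega
    have habi : abiInv s_114844 := by v_inv
    have hrsp' : s_114844.reg .rsp = v.reg .rsp := w_rsp.trans c_rsp.symm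
    have hfr' : Frame u₀ g Vorbis.L.start_decoder.loop10 A s_114844 :=
      Frame.step hfr hcur hs hun hok hb w_rip hrsp' w_eq habi
    obtain ⟨hcur', hcb'⟩ := Cur.step hfr hcur hs hun hok hb (w_kept.get .r14 rfl)
    rw [hc] at hcb'
    -- the struct: every field but `sparse` is as at `cut112`
    have hrest : RestFields v.mem s_114844.mem c := by
      apply RestFields.of_eqOn (by omega)
      all_goals
        apply hs.eqOn
        intro x hx
        simp only [List.mem_cons, List.mem_nil_iff, or_false] at hx
        have h1 := hpos.ar_stack
        have h2 := hpos.ra_hi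
        have h3 := hpos.ra_lo
        rcases hx with rfl | rfl
        · simp only []
          omega
        · simp only []
          omega
    have hcl' : Codebook.codeword_lengths s_114844.mem c = cl := by
      rw [← hcl]
      simp only [vacc, voff]
      apply Mem.EqOn.u64 (lo := c + 8) (hi := c + 16) _ _ (by omega) (by omega) (by omega)
      apply hs.eqOn
      intro x hx
      simp only [List.mem_cons, List.mem_nil_iff, or_false] at hx
      have h1 := hpos.ar_stack
      have h2 := hpos.ra_hi
      have h3 := hpos.ra_lo
      rcases hx with rfl | rfl
      · simp only []
        omega
      · simp only []
        omega
    have hsp' : Codebook.sparse s_114844.mem c = 0 := by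
      rw [← l_sp, ← hcw]
      simp only [vfield, vacc, voff]
    -- the array: the setup block `codeword_lengths`, allocated since `Ai`, is not written
    have hB : Since Ai A.1 ⟨cl, E⟩ := by
      have := hin.block
      rw [hc, hcl, hE] at this
      exact this
    obtain ⟨hBin, hBoff⟩ := young_off_book hm0 hB
    rw [hc] at hBoff
    simp only [] at hBin hBoff
    have hEq : Mem.EqOn cl (cl + E) v.mem s_114844.mem := by
      apply hs.eqOn
      intro x hx
      simp only [List.mem_cons, List.mem_nil_iff, or_false] at hx
      have h1 := hpos.ar_stack
      have h2 := hpos.ra_hi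
      have h3 := hpos.ra_lo
      rcases hx with rfl | rfl
      · simp only []
        omega
      · simp only []
        omega
    have hlen0 : LenL v.mem cl E := by
      have := hin.lenL
      rw [hc, hcl, hE] at this
      exact this
    have hE' : Codebook.entries s_114844.mem c = (E : Int) := by
      rw [hrest.entries]
      exact hE
    have hinp : InC5p u₀ Vorbis.L.start_decoder.loop10 g i A2 A3 Ai A cl 0 s_114844 :=
      { frame := hfr'
        cur := hcur'
        k1 := by
          rw [hcb']
          exact hrest.k1 (by rw [← hc]; exact hin.k1)
        rbx := w_rbx
        rbp := by
          rw [w_rbp]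
          rfl
        total_le := by
          rw [hcb', hE']
          omega
        lenL := by
          rw [hcb', hE']
          have h4 := hpos.ar_hi
          exact hlen0.same hEq (by omega)
        place := by
          rw [hcb']
          exact
            { sparse_01 := Or.inl hsp'
              sparse_temp := fun h => absurd (hsp'.symm.trans h) (by decide)
              sparse_null := fun h => absurd (hsp'.symm.trans h) (by decide)
              dense_block := fun _ => by
                rw [hE']
                exact hB
              dense_eq := fun _ => hcl'.symm
              dense_temps := fun _ => hin.noTemps }
        sparse_total := by
          rw [hcb']
          exact fun h => absurd (hsp'.symm.trans h) (by decide)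
        fresh := by
          rw [hcb']
          exact hrest.fresh (by rw [← hc]; exact hin.fresh) }
    have hsp0 : Codebook.sparse s_114844.mem (g.cb s_114844.mem i) = 0 := by
      rw [hcb']
      exact hsp'
    refine loop_ok hLay hμ hcode hload1 hload4 hinp hsp0 s_114844 ⟨0, ?_⟩
    exact
      { same := Mem.SameExcept.refl _ _
        rip := w_rip
        rsp := rfl
        inv := habi
        r14 := rfl
        rbx := rfl
        r13 := by
          rw [w_r13]
          rfl
        r12 := by
          rw [w_r12]
          rfl
        j_le := by
          rw [hcb', hE']
          omega
        rbp := by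
          rw [w_rbp]
          rfl }

/-- **`ret149` (0x114625) → `cut112` (0x114636)**: `setup_temp_free(f, lengths, c->entries)` (line 3807) releases the temp block
P1, the top and only temp block, with the size it was allocated with: `Cur.free_call`. The struct `cb(i)` and the new array lie
in setup blocks, which the release keeps (`AllKept`). -/
theorem c5c_ok {Lay : Layout} (hLay : Lay.hi = 0x1000000) {μ : Microarch} (hμ : UserX.MicroOK μ) {u₀ : State}
    (hcode : HasCodeNat Lay u₀ Vorbis.L.start_decoder.entry Vorbis.Code.code_start_decoder.nat Vorbis.L.start_decoder.size)
    (hfree : ∀ (others : List Obj) (frames : List (Nat × FrameLayout)) (A : Arena) (m : Nat) (rest : List (Nat × Nat)),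
      Calls Lay μ Vorbis.WayInv (Vorbis.conv u₀) Vorbis.L.setup_temp_free.entry
        (Vorbis.Spec.setup_temp_free.spec others frames A m rest))
    {g : Ghost} {i : Nat} {A2 A3 Ai : Arena} {A : Arena × List Obj} {lengths total : Nat} {v : State}
    (hin : InC5n u₀ Vorbis.L.start_decoder.ret149 g i A2 A3 Ai A lengths total v) :
    ReachVia Lay μ Vorbis.WayInv v (fun w => ∃ A'', InC5o u₀ g i A2 A3 Ai A'' total w) := by
  have hfr := hin.frame
  have hcur := hin.cur
  have he := hfr.entry
  v_entry he
  clear he_rip he_eq he_df he_mx he_sse he_code he_inv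
  have hRA : g.RA = (g.e.reg .rsp).toNat := rfl
  simp only [depth] at he_room he_stack
  have hpos : Pos g A := Pos.of hfr hcur
  have hm0 : MInv g i A2 A3 Ai A v.mem := MInv.of hfr hcur
  have hcw0 := hm0.c_where
  generalize hge : g.e = e at he_retAddr he_align he_room he_top he_stack hRA
  have w_rip := hfr.rip
  have hR : g.R + 1480 = g.RA := hpos.r_eq
  have hRn : g.R = (e.reg .rsp).toNat - 1480 := by
    rw [hRA] at hR
    omega
  have c_rsp : v.reg .rsp = e.reg .rsp - 1480 := by
    rw [hfr.rsp]
    unfold addr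
    rw [hRA] at hR
    u_omega
  have c_r14 := hcur.r14
  have c_rbp := hin.rbp
  have c_rbx := hin.rbx
  have w_eq : Mem.EqOn Vorbis.L.textLo Vorbis.L.textHi u₀.mem v.mem := hfr.code
  have hdf : v.flags .df = false := (show abiInv _ from hfr.inv).1
  have hmx : v.mxcsr &&& 0x1F80 = 0x1F80 := (show abiInv _ from hfr.inv).2
  have hsse := Vorbis.sseOK_of_abiInv hfr.inv
  obtain ⟨c, hc⟩ : ∃ c, g.cb v.mem i = c := ⟨_, rfl⟩
  rw [hc] at c_r14 hcw0
  obtain ⟨E, hE⟩ : ∃ E : Nat, Codebook.entries v.mem c = (E : Int) :=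
    ⟨(Codebook.entries v.mem c).toNat, (Int.toNat_of_nonneg (by rw [← hc]; exact hin.k1.ent_nonneg)).symm⟩
  have hE_lt : E < 16777216 := by
    have := hin.k1.ent_lt
    rw [hc, hE] at this
    omega
  have l_en : v.mem.readLE (addr c + 4) 4 = E := by
    simp only [vfield]
    have h1 := Mem.u32_of_i32_nonneg v.mem (c + 4)
    simp only [vacc, voff] at hE
    rw [hE] at h1
    exact h1 (by omega)
  have l_f : v.mem.readLE (e.reg .rsp - 1456) 8 = g.f := by
    have ea : e.reg .rsp - 1456 = addr (g.R + 0x18) := by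
      unfold addr
      rw [hRA] at hR
      u_omega
    rw [ea]
    simp only [vfield]
    exact hcur.slot_f
  obtain ⟨cw, hcw⟩ : ∃ cw : Word, addr c = cw := ⟨_, rfl⟩
  have hcwn : cw.toNat = c := by
    rw [← hcw]
    exact toNat_addr _ (by omega)
  rw [hcw] at c_r14 l_en
  have hc_where : 0x119d40 ≤ cw.toNat ∧ cw.toNat + 2120 ≤ 0xC00000 ∧ (cw.toNat + 2120 ≤ 0x700000 ∨ 0x800000 ≤ cw.toNat) := by
    have htx : 0x119d40 ≤ A.1.B := hcur.hand.arenaText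
    rw [hcwn]
    omega
  -- the temp block P1 = (lengths, E) is the top (and only) temp block
  have htemps0 := hin.temps
  rw [hc, hE] at htemps0
  simp only [Int.toNat_natCast] at htemps0
  have harena := hcur.sd.arena
  have htb : A.1.TBlock lengths E := htemps0.tblock (List.mem_singleton.mpr rfl)
  have htr := harena.tblock_range htb
  have htemps1 : A.1.temps = [(lengths - A.1.B, E)] := htemps0.1
  obtain ⟨htT, htop⟩ := harena.top_eq_T htemps1
  have htemps : A.1.temps = (A.1.T, E) :: [] := by
    rw [htemps1, htT]
  have hlB : A.1.B ≤ lengths := htemps0.2 (lengths, E) (List.mem_singleton.mpr rfl)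
  have hlen_eq : lengths = A.1.B + A.1.T := by omega
  have hfree' := hfree A.2 g.frames' A.1 E []
  u_walk hcode [hμ.vendor] until [Vorbis.L.start_decoder.cut112] span [Vorbis.L.textLo, Vorbis.L.textHi] side (v_side)
  case call_inv => v_inv
  case pre_114631 =>
    -- the callee's precondition is stated for the memory after the push of the return address
    have hp1 := hm0.push hpos (e.reg .rsp - 1488) 1132086 (by u_omega)
    rw [← w_mem] at hp1
    obtain ⟨hm1, hcb1⟩ := hp1
    have hrdi : (s_114631.reg .rdi).toNat = g.f := by
      rw [w_rdi]
      have := hpos.f_hi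
      exact toNat_addr _ (by omega)
    have hrsi : (s_114631.reg .rsi).toNat = A.1.B + A.1.T := by
      rw [w_rsi, toNat_addr _ (by have := hpos.ar_hi; omega)]
      exact hlen_eq
    have hrdx : (s_114631.reg .rdx).toNat = E := by
      rw [w_rdx, cnt32_ofBV E (by omega), UInt64.toNat_ofNat']
      omega
    have e8 : (s_114631.reg .rsp).toNat + 8 = g.R := by
      rw [w_rsp]
      u_omega
    refine ⟨⟨⟨?_, hfr.offText⟩, ?_, ?_, hcur.hand.arenaText⟩, Or.inr ⟨htemps, hrsi, ?_, ?_⟩⟩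
    · rw [e8]
      exact hm1.shadow
    · rw [hrdi]
      exact hm1.sd.env.live _ hm1.sd.bits.OB1
    · rw [hrdi]
      exact hm1.sd.arena
    · rw [hrdx, Nat.mod_eq_of_lt (by omega)]
    · rw [hrdi]
      exact setup_temp_free.apart_of_out harena htemps hpos.objOut
  case cont =>
    simp only [X86.User.Spec.footprint, vspec] at w_same
    have hrdi : (s_114631.reg .rdi).toNat = g.f := by
      rw [w_rdi_114631]
      have := hpos.f_hi
      exact toNat_addr _ (by omega)
    have hrsi : (s_114631.reg .rsi).toNat = A.1.B + A.1.T := by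
      rw [w_rsi_114631, toNat_addr _ (by have := hpos.ar_hi; omega)]
      exact hlen_eq
    have hrdx : (s_114631.reg .rdx).toNat = E := by
      rw [w_rdx_114631, cnt32_ofBV E (by omega), UInt64.toNat_ofNat']
      omega
    have e8 : (s_114631.reg .rsp).toNat + 8 = g.R := by
      rw [w_rsp_114631]
      u_omega
    have hne : s_114631.reg .rsi ≠ 0 := by
      intro h0
      rw [h0] at hrsi
      have := hpos.ar_lo
      have : (0 : Word).toNat = 0 := rfl
      omega
    obtain ⟨hfr', hcur', hcb', hkept⟩ := Cur.free_call (pc' := Vorbis.L.start_decoder.cut112) hfr hcur w_mem_114631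
      (by u_omega) e8 hrdi htemps hrsi (by rw [hrdx, Nat.mod_eq_of_lt (by omega)]) w_same w_post hne w_rip
      (w_rsp.trans c_rsp.symm) (Vorbis.conv_code_eqOn w_code) w_inv (w_kept.get .r14 rfl)
    rw [hc] at hcb'
    -- the struct `cb(i)` lies in the codebooks block, a setup block: kept by the release
    have hcbOK := hm0.ages.cbOK
    have hcbA : A.1.Blk (codebooksBlock v.mem g.f) := hcbOK.F2.mono hm0.ages.exti
    have hci := hcbOK.cb_in i hm0.lt
    have hcdef : stb_vorbis.codebooks_at v.mem g.f i = c := hc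
    rw [hcdef] at hci
    simp only [vblock, voff] at hci
    obtain ⟨hrest, hsp', hcl'⟩ := fields_of_kept (c := c) (hkept _ hcbA) (by simp only [vblock]; omega)
      (by simp only [vblock, voff]; omega)
    have hE' : Codebook.entries s_114631r.mem c = (E : Int) := by
      rw [hrest.entries]
      exact hE
    -- the new array: a setup block, kept; it holds the copy of the temp block
    obtain ⟨cl, hcl⟩ : ∃ cl, Codebook.codeword_lengths v.mem c = cl := ⟨_, rfl⟩
    have hB : Since Ai A.1 ⟨cl, E⟩ := by
      have := hin.block
      rw [hc, hcl, hE] at this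
      exact this
    have hkB := hkept _ hB.1
    have hlen0 : LenL v.mem cl E := by
      have h1 := hin.lenL
      have h2 := hin.copied
      rw [hc, hE] at h1
      rw [hc, hE, hcl] at h2
      exact h1.copy h2
    have hlen1 : LenL s_114631r.mem cl E := by
      intro j hj
      rw [hkB.u8 (cl + j) (by simp only []; omega) (by simp only []; omega)]
      exact hlen0 j hj
    refine ReachVia.done ⟨(A.1.withTemp (A.1.T + r8 ((s_114631.reg .rdx).toNat % 2 ^ 32) + 32) [],
      dropObjs [A.1.tempObj (A.1.T, E)] A.2), ?_⟩
    exact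
      { frame := hfr'
        cur := hcur'
        k1 := by
          rw [hcb']
          exact hrest.k1 (by rw [← hc]; exact hin.k1)
        rbp := by
          rw [w_kept.get .rbp rfl]
          exact c_rbp
        block := by
          rw [hcb', hcl', hcl, hE']
          exact ⟨hB.1, hB.2⟩
        sparse1 := by
          rw [hcb', hsp', ← hc]
          exact hin.sparse1
        lenL := by
          rw [hcb', hcl', hcl, hE']
          exact hlen1
        noTemps := rfl
        total_le := by
          rw [hcb', hE', hin.total_eq, hc, hE]
          have := usedCount_le v.mem lengths E
          simp only [Int.toNat_natCast]
          omega
        fresh := by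
          rw [hcb']
          exact hrest.fresh (by rw [← hc]; exact hin.fresh) }

/-- **`cut110` (0x1145e9) → `ret149` (0x114625), the allocation succeeded** (rax = `p ≠ 0`, a block allocated since `A.1`):
`c->codeword_lengths = p` (check of `c + 8`, the store), `memcpy(p, lengths, c->entries)` (line 3806: source = the temp block P1,
destination = the new setup block, which lies below it), the check of `c + 4` of line 3807. The carry: `minv_ok` over the stack
below `R`, the field `[c + 8, c + 16)` and the young block `[p, p + E)`. -/
theorem c5b_copy {Lay : Layout} (hLay : Lay.hi = 0x1000000) {μ : Microarch} (hμ : UserX.MicroOK μ) {u₀ : State}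
    (hcode : HasCodeNat Lay u₀ Vorbis.L.start_decoder.entry Vorbis.Code.code_start_decoder.nat Vorbis.L.start_decoder.size)
    (hload4 : Asan.SmallCheck Lay μ Vorbis.WayInv (Vorbis.CodeOK u₀) [.rax, .rcx, .rdx] 4 Vorbis.L.__asan_load4_noabort.entry)
    (hstore8 : Asan.SmallCheck Lay μ Vorbis.WayInv (Vorbis.CodeOK u₀) [.rax, .rcx, .rdx] 8 Vorbis.L.__asan_store8_noabort.entry)
    (hmemcpy : ∀ (others : List Obj) (frames : List (Nat × FrameLayout)),
      Calls Lay μ Vorbis.WayInv (Vorbis.conv u₀) Vorbis.L.memcpy.entry (Vorbis.Spec.memcpy.spec others frames))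
    {g : Ghost} {i : Nat} {A2 A3 Ai : Arena} {A A' : Arena × List Obj} {lengths total : Nat} {v : State}
    (hin : InC5m u₀ g i A2 A3 Ai A A' lengths total v) (p : Nat) (hrax : v.reg .rax = addr p)
    (hblk : Since A.1 A'.1 ⟨p, (Codebook.entries v.mem (g.cb v.mem i)).toNat⟩) :
    ReachVia Lay μ Vorbis.WayInv v
      (fun w => ∃ A'', InC5n u₀ Vorbis.L.start_decoder.ret149 g i A2 A3 Ai A'' lengths total w) := by
  have hfr := hin.frame
  have hcur := hin.cur
  have he := hfr.entry
  v_entry he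
  clear he_rip he_eq he_df he_mx he_sse he_code he_inv
  have hRA : g.RA = (g.e.reg .rsp).toNat := rfl
  simp only [depth] at he_room he_stack
  have hpos : Pos g A' := Pos.of hfr hcur
  have hm0 : MInv g i A2 A3 Ai A' v.mem := MInv.of hfr hcur
  have hcw0 := hm0.c_where
  generalize hge : g.e = e at he_retAddr he_align he_room he_top he_stack hRA
  have w_rip := hfr.rip
  have hR : g.R + 1480 = g.RA := hpos.r_eq
  have hRn : g.R = (e.reg .rsp).toNat - 1480 := by
    rw [hRA] at hR
    omega
  have c_rsp : v.reg .rsp = e.reg .rsp - 1480 := by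
    rw [hfr.rsp]
    unfold addr
    rw [hRA] at hR
    u_omega
  have c_r14 := hcur.r14
  have c_rbp := hin.rbp
  have c_rbx := hin.rbx
  have c_rax := hrax
  have w_eq : Mem.EqOn Vorbis.L.textLo Vorbis.L.textHi u₀.mem v.mem := hfr.code
  have hdf : v.flags .df = false := (show abiInv _ from hfr.inv).1
  have hmx : v.mxcsr &&& 0x1F80 = 0x1F80 := (show abiInv _ from hfr.inv).2
  have hsse := Vorbis.sseOK_of_abiInv hfr.inv
  obtain ⟨c, hc⟩ : ∃ c, g.cb v.mem i = c := ⟨_, rfl⟩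
  rw [hc] at c_r14 hcw0 hblk
  obtain ⟨E, hE⟩ : ∃ E : Nat, Codebook.entries v.mem c = (E : Int) :=
    ⟨(Codebook.entries v.mem c).toNat, (Int.toNat_of_nonneg (by rw [← hc]; exact hin.k1.ent_nonneg)).symm⟩
  have hE_lt : E < 16777216 := by
    have := hin.k1.ent_lt
    rw [hc, hE] at this
    omega
  rw [hE] at hblk
  simp only [Int.toNat_natCast] at hblk
  have l_en : v.mem.readLE (addr c + 4) 4 = E := by
    simp only [vfield]
    have h1 := Mem.u32_of_i32_nonneg v.mem (c + 4)
    simp only [vacc, voff] at hE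
    rw [hE] at h1
    exact h1 (by omega)
  obtain ⟨cw, hcw⟩ : ∃ cw : Word, addr c = cw := ⟨_, rfl⟩
  have hcwn : cw.toNat = c := by
    rw [← hcw]
    exact toNat_addr _ (by omega)
  rw [hcw] at c_r14 l_en
  have hc_where : 0x119d40 ≤ cw.toNat ∧ cw.toNat + 2120 ≤ 0xC00000 ∧ (cw.toNat + 2120 ≤ 0x700000 ∨ 0x800000 ≤ cw.toNat) := by
    have htx : 0x119d40 ≤ A'.1.B := hcur.hand.arenaText
    rw [hcwn]
    omega
  have hL := hcur.sd.env.live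
  have hcbok : CodebooksOK (g.Blk A') v.mem g.f := ((hcur.sd.cb0 (by omega)).1).ok (hcur.sd.cb0 (by omega)).2
  have hsite_c : ∀ off n, off + n ≤ 2120 → 1 ≤ n → Site (g.Live A') (c + off) n := by
    intro off n h1 h2
    rw [← hc]
    exact CodebooksOK.site_cb_field hL hcbok i hcur.lt off n (by simp only [voff]; omega) h2 rfl
  -- the new block `p`: allocated since the head of the iteration, inside the arena, off the struct
  have hB : Since Ai A'.1 ⟨p, E⟩ := hblk.older hin.exti
  obtain ⟨hBin, hBoff⟩ := young_off_book hm0 hB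
  rw [hc] at hBoff
  simp only [] at hBin hBoff
  obtain ⟨pw, hpw⟩ : ∃ pw : Word, addr p = pw := ⟨_, rfl⟩
  have hpwn : pw.toNat = p := by
    rw [← hpw]
    have := hpos.ar_hi
    exact toNat_addr _ (by omega)
  rw [hpw] at c_rax
  clear hrax
  have hp_ne : pw.toNat ≠ 0 := by
    have := hpos.ar_lo
    omega
  -- the temp block P1 = (lengths, E)
  have htemps0 := hin.temps
  rw [hc, hE] at htemps0
  simp only [Int.toNat_natCast] at htemps0
  have harena := hcur.sd.arena
  have htb : A'.1.TBlock lengths E := htemps0.tblock (List.mem_singleton.mpr rfl)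
  have htr := harena.tblock_range htb
  obtain ⟨lw, hlw⟩ : ∃ lw : Word, addr lengths = lw := ⟨_, rfl⟩
  have hlwn : lw.toNat = lengths := by
    rw [← hlw]
    have := hpos.ar_hi
    exact toNat_addr _ (by omega)
  rw [hlw] at c_rbx
  have hcpy := hmemcpy A'.2 g.frames'
  u_walk hcode [hμ.vendor, cnt32_sext_bv E (by omega)] until [Vorbis.L.start_decoder.ret149, Vorbis.L.start_decoder.cut4] span [Vorbis.L.textLo, Vorbis.L.textHi] side (v_side)
  case check_1145f0 =>
    have hun : ShadowUntouched v.mem s_1145f0.mem := by v_untouched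
    refine Vorbis.Spec.check_site hfr.shadow hun (hsite_c 8 8 (by omega) (by omega)) ?_
    u_omega
  case check_114609 =>
    have hun : ShadowUntouched v.mem s_114609.mem := by v_untouched
    refine Vorbis.Spec.check_site hfr.shadow hun (hsite_c 4 4 (by omega) (by omega)) ?_
    u_omega
  case call_inv => v_inv
  case pre_114618 =>
    -- memcpy(p, lengths, E): the shadow layer after the store and the pushes; source = the temp block, destination = the new block
    have hs1 : Mem.SameExcept [⟨g.R - 8, g.R⟩, ⟨c + 8, c + 16⟩] v.mem s_114618.mem := by
      rw [hRn, ← hcwn]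
      u_same
    have hun1 : ShadowUntouched v.mem s_114618.mem := by v_untouched
    obtain ⟨hm1, hcb1⟩ := minv_ok hm0 hpos hc hs1 hun1 (by
      intro w hw
      simp only [List.mem_cons, List.mem_nil_iff, or_false] at hw
      rcases hw with rfl | rfl
      · left
        simp only []
        omega
      · right
        left
        simp only []
        omega)
    have e8 : (s_114618.reg .rsp).toNat + 8 = g.R := by
      rw [w_rsp]
      u_omega
    have hrdx : (s_114618.reg .rdx).toNat = E := by
      rw [w_rdx, cnt32_sext_bv E (by omega), UInt64.toNat_ofNat']
      omega
    have hdis := harena.blk_tblock_disjoint hB.1 htb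
    simp only [vblock] at hdis
    refine ⟨⟨?_, hfr.offText⟩, Or.inr ⟨?_, ?_, ?_⟩⟩
    · rw [e8]
      exact hm1.shadow
    · rw [w_rsi, hlwn, hrdx]
      exact ⟨⟨lengths, E, .temp⟩, List.mem_append_right _ (harena.AR6 _ htb.obj_mem), Nat.le_refl _, Nat.le_refl _⟩
    · rw [w_rdi, hpwn, hrdx]
      exact liveIn_of_arenaBlk harena hB.1
    · rw [w_rdi, hpwn, w_rsi, hlwn, hrdx]
      omega
  case cont =>
    obtain ⟨hrax', hunp, hcopy⟩ := w_post
    v_after_call w_rsp_114618 w_mem_114618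
    have hrdxw : s_114618.reg .rdx = UInt64.ofNat E := by
      rw [w_rdx_114618, cnt32_sext_bv E (by omega)]
    simp only [w_rdi_114618, hrdxw, w_rsi_114618] at w_same hcopy
    -- the field `codeword_lengths` holds `p`, through memcpy's footprint
    have hp1 : s_114618.mem.readLE (cw + 8) 8 = pw.toNat := by
      rw [w_mem_114618]
      u_read
    rw [w_mem_114618] at hp1
    have hq1 : s_114618r.mem.readLE (cw + 8) 8 = pw.toNat := by
      u_frame hp1
    have hun0 : ShadowUntouched v.mem s_114618.mem := by
      rw [w_mem_114618]
      v_untouched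
    have hun : ShadowUntouched v.mem s_114618r.mem := Mem.EqOn.trans hun0 hunp
    have hsame : Mem.SameExcept [⟨g.R - 408, g.R⟩, ⟨c + 8, c + 16⟩, ⟨p, p + E⟩] v.mem s_114618r.mem := by
      rw [hRn, ← hcwn, ← hpwn]
      u_same
    obtain ⟨z, w_rax⟩ : ∃ z, s_114618r.reg .rax = z := ⟨_, rfl⟩
    u_walk hcode [hμ.vendor] until [Vorbis.L.start_decoder.ret149, Vorbis.L.start_decoder.cut4] span [Vorbis.L.textLo, Vorbis.L.textHi] side (v_side)
    case check_114620 =>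
      have hun' : ShadowUntouched v.mem s_114620.mem := by
        rw [w_mem]
        refine Mem.EqOn.trans hun ?_
        exact Mem.eqOn_writeLE _ _ 8 _ 0xC00000 0x200000 (by u_omega) (by u_omega)
      refine Vorbis.Spec.check_site hfr.shadow hun' (hsite_c 4 4 (by omega) (by omega)) ?_
      u_omega
    case cont =>
      -- 0x114625 (`ret149`): the assertion `InC5n`
      have hpush : Mem.SameExcept [⟨g.R - 8, g.R⟩] s_114618r.mem s_114620r.mem := by
        rw [w_mem]
        apply Mem.SameExcept.writeLE
        · u_omega
        · refine ⟨_, List.mem_cons_self, ?_, ?_⟩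
          · simp only []
            u_omega
          · simp only []
            u_omega
      have hall : Mem.SameExcept [⟨g.R - 408, g.R⟩, ⟨c + 8, c + 16⟩, ⟨p, p + E⟩] v.mem s_114620r.mem := by
        apply hsame.trans
        apply hpush.mono
        intro w hw a h1 h2
        rw [List.mem_singleton.mp hw] at h1 h2
        simp only [] at h1 h2
        exact ⟨_, List.mem_cons_self, by simp only []; omega, by simp only []; omega⟩
      have hunAll : ShadowUntouched v.mem s_114620r.mem := by
        rw [w_mem]
        refine Mem.EqOn.trans hun ?_
        exact Mem.eqOn_writeLE _ _ 8 _ 0xC00000 0x200000 (by u_omega) (by u_omega)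
      have g1 := hpos.ar_stack
      have g2 := hpos.ra_hi
      have g3 := hpos.ra_lo
      have g4 := hpos.ar_hi
      obtain ⟨hm2, hcb2⟩ := minv_ok hm0 hpos hc hall hunAll (by
        intro w hw
        simp only [List.mem_cons, List.mem_nil_iff, or_false] at hw
        rcases hw with rfl | rfl | rfl
        · left
          simp only []
          omega
        · right
          left
          simp only []
          omega
        · right
          right
          refine ⟨hBin.1, hBin.2, fun B0 hB0 => ?_⟩
          have := harena.old_disjoint_since hcur.ages.exti hB0 hB
          simp only [vblock] at this
          omega)
      have habi : abiInv s_114620r := by v_inv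
      have hfr' : Frame u₀ g Vorbis.L.start_decoder.ret149 A' s_114620r :=
        hm2.frame hfr w_rip (by rw [w_rsp, ← c_rsp]; exact hfr.rsp) w_eq habi hfr.offText hfr.ext
      have hcur' : Cur g i A2 A3 Ai A' s_114620r := by
        apply hm2.cur hcur.hand
        rw [hcb2, w_kept.get .r14 rfl, c_r14, hcw]
      -- the struct: every field but `codeword_lengths` is as at `cut110`
      have hwin : ∀ lo hi, c ≤ lo → hi ≤ c + 2120 → (hi ≤ c + 8 ∨ c + 16 ≤ lo) → Mem.EqOn lo hi v.mem s_114620r.mem := by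
        intro lo hi h1 h2 h3
        apply hall.eqOn
        intro x hx
        simp only [List.mem_cons, List.mem_nil_iff, or_false] at hx
        rcases hx with rfl | rfl | rfl
        · simp only []
          omega
        · simp only []
          omega
        · simp only []
          omega
      have hrest : RestFields v.mem s_114620r.mem c :=
        RestFields.of_eqOn (by omega) (hwin _ _ (by omega) (by omega) (by omega))
          (hwin _ _ (by omega) (by omega) (by omega)) (hwin _ _ (by omega) (by omega) (by omega))
      have hsp' : Codebook.sparse s_114620r.mem c = Codebook.sparse v.mem c := by
        simp only [vacc, voff]
        exact (hwin (c + 27) (c + 28) (by omega) (by omega) (by omega)).u8 _ (by omega) (by omega) (by omega)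
      have hE' : Codebook.entries s_114620r.mem c = (E : Int) := by
        rw [hrest.entries]
        exact hE
      have hcl' : Codebook.codeword_lengths s_114620r.mem c = p := by
        have hr : s_114620r.mem.readLE (cw + 8) 8 = pw.toNat := by
          rw [w_mem]
          u_frame hq1
        rw [← hpwn, ← hr, ← hcw]
        simp only [vfield, vacc, voff]
      -- the temp block `lengths` is not written
      have hcbA : A'.1.Blk (codebooksBlock v.mem g.f) := hm0.ages.cbOK.F2.mono hm0.ages.exti
      have hci := hm0.ages.cbOK.cb_in i hm0.lt
      have hcdef : stb_vorbis.codebooks_at v.mem g.f i = c := hc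
      rw [hcdef] at hci
      have hd1 := harena.blk_tblock_disjoint hcbA htb
      have hd2 := harena.blk_tblock_disjoint hB.1 htb
      simp only [vblock, voff] at hci hd1 hd2
      have hEq : Mem.EqOn lengths (lengths + E) v.mem s_114620r.mem := by
        apply hall.eqOn
        intro x hx
        simp only [List.mem_cons, List.mem_nil_iff, or_false] at hx
        have := le_r8 E
        rcases hx with rfl | rfl | rfl
        · simp only []
          omega
        · simp only []
          omega
        · simp only []
          omega
      -- the copy: memcpy's post, the source read in the memory of the call state
      have hs1 : Mem.SameExcept [⟨g.R - 8, g.R⟩, ⟨c + 8, c + 16⟩] v.mem s_114618.mem := by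
        rw [hRn, ← hcwn]
        u_same
      have hE64 : (UInt64.ofNat E).toNat = E := by
        rw [UInt64.toNat_ofNat']
        omega
      have hcopied : ∀ j, j < E → s_114620r.mem.u8 (p + j) = s_114620r.mem.u8 (lengths + j) := by
        intro j hj
        have e1 : s_114620r.mem.u8 (p + j) = s_114618r.mem.u8 (p + j) := by
          apply Mem.EqOn.u8 (lo := p + j) (hi := p + j + 1) _ _ (by omega) (by omega) (by omega)
          apply hpush.eqOn
          intro x hx
          rw [List.mem_singleton.mp hx]
          simp only []
          omega
        have e2 : s_114618r.mem.u8 (p + j) = s_114618.mem.u8 (lengths + j) := by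
          have := hcopy j (by rw [hE64]; exact hj)
          rw [← hpw, ← hlw, addr_add, addr_add] at this
          exact this
        have e3 : s_114618.mem.u8 (lengths + j) = v.mem.u8 (lengths + j) := by
          apply Mem.EqOn.u8 (lo := lengths + j) (hi := lengths + j + 1) _ _ (by omega) (by omega) (by omega)
          apply hs1.eqOn
          intro x hx
          simp only [List.mem_cons, List.mem_nil_iff, or_false] at hx
          have := le_r8 E
          rcases hx with rfl | rfl
          · simp only []
            omega
          · simp only []
            omega
        have e4 : s_114620r.mem.u8 (lengths + j) = v.mem.u8 (lengths + j) :=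
          hEq.u8 _ (by omega) (by omega) (by omega)
        rw [e1, e2, e3, e4]
      have hcnt := counts_same hEq (by omega)
      refine ReachVia.done ⟨A', ?_⟩
      exact
        { frame := hfr'
          cur := hcur'
          k1 := by
            rw [hcb2]
            exact hrest.k1 (by rw [← hc]; exact hin.k1)
          rbx := by
            rw [w_kept.get .rbx rfl, c_rbx, hlw]
          rbp := by
            rw [w_kept.get .rbp rfl]
            exact c_rbp
          r12 := by
            rw [hcb2, hcl', w_r12, hpw]
          block := by
            rw [hcb2, hcl', hE']
            exact hB
          copied := by
            rw [hcb2, hcl', hE']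
            exact hcopied
          sparse1 := by
            rw [hcb2, hsp', ← hc]
            exact hin.sparse1
          lenL := by
            rw [hcb2, hE']
            have h1 := hin.lenL
            rw [hc, hE] at h1
            exact h1.same hEq (by omega)
          temps := by
            rw [hcb2, hE']
            exact htemps0
          total_eq := by
            rw [hcb2, hE']
            simp only [Int.toNat_natCast]
            rw [hcnt.1, hin.total_eq, hc, hE]
            simp only [Int.toNat_natCast]
          fresh := by
            rw [hcb2]
            exact hrest.fresh (by rw [← hc]; exact hin.fresh) }

/-- **`cut110` (0x1145e9) → `AtERR`, the allocation failed** (rax = 0): `c->codeword_lengths = NULL` is stored, the test of line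
3805 goes to ERRSTUB(3) 0x114825 (`error(f, VORBIS_outofmem)`), `jmp 0x113b22`: the single epilogue with eax = 0 and `Failed`
(`Cur.failed`; the temp block P1 stays allocated: D9). -/
theorem c5b_fail {Lay : Layout} (hLay : Lay.hi = 0x1000000) {μ : Microarch} (hμ : UserX.MicroOK μ) {u₀ : State}
    (hcode : HasCodeNat Lay u₀ Vorbis.L.start_decoder.entry Vorbis.Code.code_start_decoder.nat Vorbis.L.start_decoder.size)
    (hstore8 : Asan.SmallCheck Lay μ Vorbis.WayInv (Vorbis.CodeOK u₀) [.rax, .rcx, .rdx] 8 Vorbis.L.__asan_store8_noabort.entry)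
    (herror : ∀ (others : List Obj) (frames : List (Nat × FrameLayout)),
      Calls Lay μ Vorbis.WayInv (Vorbis.conv u₀) Vorbis.L.error.entry (Vorbis.Spec.error.spec others frames))
    {g : Ghost} {i : Nat} {A2 A3 Ai : Arena} {A A' : Arena × List Obj} {lengths total : Nat} {v : State}
    (hin : InC5m u₀ g i A2 A3 Ai A A' lengths total v) (hrax : v.reg .rax = 0) :
    ReachVia Lay μ Vorbis.WayInv v (fun w => AtERR u₀ g w) := by
  have hfr := hin.frame
  have hcur := hin.cur
  have he := hfr.entry
  v_entry he
  clear he_rip he_eq he_df he_mx he_sse he_code he_inv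
  have hRA : g.RA = (g.e.reg .rsp).toNat := rfl
  simp only [depth] at he_room he_stack
  have hpos : Pos g A' := Pos.of hfr hcur
  have hm0 : MInv g i A2 A3 Ai A' v.mem := MInv.of hfr hcur
  have hcw0 := hm0.c_where
  generalize hge : g.e = e at he_retAddr he_align he_room he_top he_stack hRA
  have w_rip := hfr.rip
  have hR : g.R + 1480 = g.RA := hpos.r_eq
  have hRn : g.R = (e.reg .rsp).toNat - 1480 := by
    rw [hRA] at hR
    omega
  have c_rsp : v.reg .rsp = e.reg .rsp - 1480 := by
    rw [hfr.rsp]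
    unfold addr
    rw [hRA] at hR
    u_omega
  have c_r14 := hcur.r14
  have c_rbp := hin.rbp
  have c_rbx := hin.rbx
  have c_rax := hrax
  have w_eq : Mem.EqOn Vorbis.L.textLo Vorbis.L.textHi u₀.mem v.mem := hfr.code
  have hdf : v.flags .df = false := (show abiInv _ from hfr.inv).1
  have hmx : v.mxcsr &&& 0x1F80 = 0x1F80 := (show abiInv _ from hfr.inv).2
  have hsse := Vorbis.sseOK_of_abiInv hfr.inv
  obtain ⟨c, hc⟩ : ∃ c, g.cb v.mem i = c := ⟨_, rfl⟩
  rw [hc] at c_r14 hcw0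
  obtain ⟨E, hE⟩ : ∃ E : Nat, Codebook.entries v.mem c = (E : Int) :=
    ⟨(Codebook.entries v.mem c).toNat, (Int.toNat_of_nonneg (by rw [← hc]; exact hin.k1.ent_nonneg)).symm⟩
  have hE_lt : E < 16777216 := by
    have := hin.k1.ent_lt
    rw [hc, hE] at this
    omega
  have l_en : v.mem.readLE (addr c + 4) 4 = E := by
    simp only [vfield]
    have h1 := Mem.u32_of_i32_nonneg v.mem (c + 4)
    simp only [vacc, voff] at hE
    rw [hE] at h1
    exact h1 (by omega)
  obtain ⟨cw, hcw⟩ : ∃ cw : Word, addr c = cw := ⟨_, rfl⟩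
  have hcwn : cw.toNat = c := by
    rw [← hcw]
    exact toNat_addr _ (by omega)
  rw [hcw] at c_r14 l_en
  have hc_where : 0x119d40 ≤ cw.toNat ∧ cw.toNat + 2120 ≤ 0xC00000 ∧ (cw.toNat + 2120 ≤ 0x700000 ∨ 0x800000 ≤ cw.toNat) := by
    have htx : 0x119d40 ≤ A'.1.B := hcur.hand.arenaText
    rw [hcwn]
    omega
  have hL := hcur.sd.env.live
  have hcbok : CodebooksOK (g.Blk A') v.mem g.f := ((hcur.sd.cb0 (by omega)).1).ok (hcur.sd.cb0 (by omega)).2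
  have hsite_c : ∀ off n, off + n ≤ 2120 → 1 ≤ n → Site (g.Live A') (c + off) n := by
    intro off n h1 h2
    rw [← hc]
    exact CodebooksOK.site_cb_field hL hcbok i hcur.lt off n (by simp only [voff]; omega) h2 rfl
  have l_f : v.mem.readLE (e.reg .rsp - 1456) 8 = g.f := by
    have ea : e.reg .rsp - 1456 = addr (g.R + 0x18) := by
      unfold addr
      rw [hRA] at hR
      u_omega
    rw [ea]
    simp only [vfield]
    exact hcur.slot_f
  have herr := herror A'.2 g.frames'
  u_walk hcode [hμ.vendor] until [Vorbis.L.start_decoder.ret149, Vorbis.L.start_decoder.cut4] span [Vorbis.L.textLo, Vorbis.L.textHi] side (v_side)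
  case check_1145f0 =>
    have hun : ShadowUntouched v.mem s_1145f0.mem := by v_untouched
    refine Vorbis.Spec.check_site hfr.shadow hun (hsite_c 8 8 (by omega) (by omega)) ?_
    u_omega
  case call_inv => v_inv
  case pre_114832 =>
    -- error(f, VORBIS_outofmem): the shadow layer after the store of NULL and the pushes; `*f` is a live object
    have hs1 : Mem.SameExcept [⟨g.R - 8, g.R⟩, ⟨c + 8, c + 16⟩] v.mem s_114832.mem := by
      rw [hRn, ← hcwn]
      u_same
    have hun1 : ShadowUntouched v.mem s_114832.mem := by v_untouched
    obtain ⟨hm1, hcb1⟩ := minv_ok hm0 hpos hc hs1 hun1 (by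
      intro w hw
      simp only [List.mem_cons, List.mem_nil_iff, or_false] at hw
      rcases hw with rfl | rfl
      · left
        simp only []
        omega
      · right
        left
        simp only []
        omega)
    have e8 : (s_114832.reg .rsp).toNat + 8 = g.R := by
      rw [w_rsp]
      u_omega
    have hrdi : (s_114832.reg .rdi).toNat = g.f := by
      rw [w_rdi]
      have := hpos.f_hi
      exact toNat_addr _ (by omega)
    refine ⟨⟨?_, hfr.offText⟩, ?_⟩
    · rw [e8]
      exact hm1.shadow
    · rw [hrdi]
      exact hcur.hand.obj.mono (sub_frames g A')
  case cont =>
    obtain ⟨hrax', hunp, herrv⟩ := w_post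
    v_after_call w_rsp_114832 w_mem_114832
    have hrdi : (s_114832.reg .rdi).toNat = g.f := by
      rw [w_rdi_114832]
      have := hpos.f_hi
      exact toNat_addr _ (by omega)
    simp only [hrdi] at w_same
    have hun0 : ShadowUntouched v.mem s_114832.mem := by
      rw [w_mem_114832]
      v_untouched
    have hun : ShadowUntouched v.mem s_114832r.mem := Mem.EqOn.trans hun0 hunp
    have g1 := hpos.ar_stack
    have g2 := hpos.ra_hi
    have g3 := hpos.ra_lo
    have g4 := hpos.ar_hi
    have g5 := hpos.f_stack
    have g6 := hpos.f_hi
    have g7 := hpos.objOut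
    have hsame : Mem.SameExcept [⟨g.R - 408, g.R⟩, ⟨c + 8, c + 16⟩, ⟨g.f + 140, g.f + 144⟩] v.mem s_114832r.mem := by
      rw [hRn, ← hcwn]
      u_same
    have w_rax : s_114832r.reg .rax = 0 := hrax'
    u_walk hcode [hμ.vendor] until [Vorbis.L.start_decoder.ret149, Vorbis.L.start_decoder.cut4] span [Vorbis.L.textLo, Vorbis.L.textHi] side (v_side)
    -- 0x113b22, the single epilogue: `Frame`, eax = 0, `Failed`
    have hb : Bits (g.Blk A') g.len s_114832r.mem g.f := by
      apply bits_kept hpos hm0.sd.bits hsame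
      intro w hw
      simp only [List.mem_cons, List.mem_nil_iff, or_false] at hw
      rcases hw with rfl | rfl | rfl
      · left
        simp only []
        omega
      · right
        left
        simp only []
        omega
      · right
        right
        left
        simp only []
        omega
    obtain ⟨hm2, hcb2⟩ := hm0.step hpos hc hsame hun (by
      intro w hw
      simp only [List.mem_cons, List.mem_nil_iff, or_false] at hw
      apply OkWin0.ok
      unfold OkWin0
      rcases hw with rfl | rfl | rfl
      · left
        simp only []
        omega
      · right
        right
        right
        left
        simp only []
        omega
      · right
        right
        right
        right
        right
        right
        left
        simp only []
        omega) hb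
    rw [← w_mem] at hm2 hcb2
    have habi : abiInv s_114837 := by v_inv
    have hfr' : Frame u₀ g pc_ERR A' s_114837 :=
      hm2.frame hfr w_rip (by rw [w_rsp, ← c_rsp]; exact hfr.rsp) w_eq habi hfr.offText hfr.ext
    have hcur' : Cur g i A2 A3 Ai A' s_114837 := by
      apply hm2.cur hcur.hand
      rw [hcb2, w_kept.get .r14 rfl, c_r14, hcw]
    refine ReachVia.done ⟨A', hfr', hcur.hand, Or.inl ⟨?_, hcur'.failed⟩⟩
    rw [w_rax]
    rfl

/-- **`cut110` → `ret149` ∨ `AtERR`**: the two outcomes of `setup_malloc` (`InC5m.result`). -/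
theorem c5b_ok {Lay : Layout} (hLay : Lay.hi = 0x1000000) {μ : Microarch} (hμ : UserX.MicroOK μ) {u₀ : State}
    (hcode : HasCodeNat Lay u₀ Vorbis.L.start_decoder.entry Vorbis.Code.code_start_decoder.nat Vorbis.L.start_decoder.size)
    (hload4 : Asan.SmallCheck Lay μ Vorbis.WayInv (Vorbis.CodeOK u₀) [.rax, .rcx, .rdx] 4 Vorbis.L.__asan_load4_noabort.entry)
    (hstore8 : Asan.SmallCheck Lay μ Vorbis.WayInv (Vorbis.CodeOK u₀) [.rax, .rcx, .rdx] 8 Vorbis.L.__asan_store8_noabort.entry)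
    (hmemcpy : ∀ (others : List Obj) (frames : List (Nat × FrameLayout)),
      Calls Lay μ Vorbis.WayInv (Vorbis.conv u₀) Vorbis.L.memcpy.entry (Vorbis.Spec.memcpy.spec others frames))
    (herror : ∀ (others : List Obj) (frames : List (Nat × FrameLayout)),
      Calls Lay μ Vorbis.WayInv (Vorbis.conv u₀) Vorbis.L.error.entry (Vorbis.Spec.error.spec others frames))
    {g : Ghost} {i : Nat} {A2 A3 Ai : Arena} {A A' : Arena × List Obj} {lengths total : Nat} {v : State}
    (hin : InC5m u₀ g i A2 A3 Ai A A' lengths total v) :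
    ReachVia Lay μ Vorbis.WayInv v
      (fun w => (∃ A'', InC5n u₀ Vorbis.L.start_decoder.ret149 g i A2 A3 Ai A'' lengths total w) ∨ AtERR u₀ g w) := by
  rcases hin.result with ⟨_, hrax, hblk⟩ | ⟨_, hrax⟩
  · rw [← Nat.add_assoc] at hblk
    exact (c5b_copy hLay hμ hcode hload4 hstore8 hmemcpy hin _ hrax hblk).mono (fun w hw => Or.inl hw)
  · exact (c5b_fail hLay hμ hcode hstore8 herror hin hrax).mono (fun w hw => Or.inr hw)


end Vorbis.Spec.start_decoder_C5
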